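/-
  Vorbis/Spec/StartDecoderCarry.lean — THE CARRY LAYER OF start_decoder's CODEBOOK LOOP (segments C1 … C16)

  WHAT IT IS FOR.  Every assertion of the codebook loop (`InC<k>`, Vorbis/Spec/StartDecoderA.lean) is `Frame` (19 fields, 11 of them
  read the memory) + `Cur` (`SDw` 10 fields, `BookTrans`, ZF, two stack slots, r14) + the clauses of the point.  Every `call` of a
  segment changes the memory (the pushed return address, the callee's footprint), every store does: `Frame` and `Cur` must be
  RE-ESTABLISHED for the new memory.  This file does it ONCE:

      Pos g A                 where things are (memory-independent): RA, `*f`, the arena, `log2_4`            `Pos.of`, `Pos.grow`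
      MInv g i A2 A3 Ai A m   the memory-dependent part of `Frame` + `Cur` for the memory `m`                 `MInv.of`, `.frame`, `.cur`
      OkWin0 / OkWin / OkWinA what a step may write (a window of a footprint, or the bytes of a store)
      MInv.move               THE lemma: `MInv` over `Mem.SameExcept ws m m'`, every window `OkWinA`, the ghost arena `A → A'`
      MInv.step               … the arena stays, no shadow byte written   (get_bits, ilog, error, memset, compute_*, a store, a push)
      MInv.push               … the push of a return address
      MInv.alloc              … `setup_malloc` succeeded: the ghost is `(A.1.pushSetup n, A.1.newSetupObj n :: A.2)`
      MInv.rearena            … any allocator (`setup_temp_malloc`, `setup_temp_free`): the new ghost is the caller's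
      Frame.step, Cur.step, Cur.alloc, Cur.free      the same, stated for `Frame` / `Cur` at two STATES (the form the reports asked for)
      Cur.alloc_call, Cur.alloc_fail, Cur.free_call  a WHOLE `call setup_malloc` / `call setup_temp_free` in the walker's terms (push + footprint + post)
      hand_dropTemp, live_dropTemp, liveIn_dropTemp  the live list after `dropObjs [temp object]` (from the accepted proof of start_decoder.C15)
      BookFields, .k1 … .k4c  K1 – K4c of the book under construction WITHOUT `Codebook.SameFields` (fast_huffman may change)
      K15.of_kept, K15.store_book   K1 – K5 over a change of `multiplicands`
      blk_kept0, bits_kept, f_off_frame, obj_above, MInv.c_where   the geometry every worker wrote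

  CORRECTION of a doc line of Vorbis/Spec/StartDecoderA.lean (l. 443, "THE PAYOFF (proved below) … `K15.store_book`"): that lemma was
  NOT in the tree.  It is HERE (`K15.store_book`, from the worker of start_decoder.C12); `K15.frame` cannot be used over the store
  `c->multiplicands = p` (its premise `Codebook.SameFields` contains `multiplicands mem' c = multiplicands mem c`).

  THE PATTERN (a segment carries ONE hypothesis `hm : MInv g i A2 A3 Ai A s.mem` from call return to call return).  Example: the return
  of `call get_bits` in a segment whose entry assertion is `h : InC<k> …` (`w_same`, `w_post` are what the walker leaves at `s_<a>r`;
  a complete instance: farm/worked/start_decoder.C9a/Proof.lean, over compute_accelerated_huffman):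

      have hpos : Pos g A := Pos.of h.frame h.cur
      have hm0 : MInv g i A2 A3 Ai A v.mem := MInv.of h.frame h.cur
      … u_walk … ; at `pre_<a>` (the callee's pre speaks of the memory AFTER the push):
      obtain ⟨hm1, hcb1⟩ := hm0.push hpos (v.reg .rsp - 8) <ret> (by u_omega) ; rw [← w_mem] at hm1 hcb1
      … case cont =>   simp only [X86.User.Spec.footprint, vspec, w_rsp_<a>, w_rdi_<a>] at w_same
      have hall : Mem.SameExcept (⟨g.R - 368, g.R⟩ :: Reader.winsBits g.f) v.mem s_<a>r.mem := …   -- the push `.trans` `w_same.mono`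
      obtain ⟨hm2, hcb2⟩ := hm0.step hpos rfl hall (hun0.trans w_post.untouched) (fun w hw => OkWin0.ok (by …; u_omega)) w_post.bits.bits
      have hfr' := hm2.frame h.frame w_rip (by rw [w_rsp]; exact h.frame.rsp) (Vorbis.conv_code_eqOn w_code) w_inv h.frame.offText h.frame.ext
      have hcu' := hm2.cur h.cur.hand (by rw [hcb2, w_kept.get .r14 rfl]; exact c_r14)        -- c_r14 := h.cur.r14, saved BEFORE the walk
      -- the point's own clauses: rewrite `g.cb s_<a>r.mem i` with `hcb2`, then `BookFields.of_step0` + `.k1 … .k4c`, or `K15.of_fields` /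
      -- `K15.frame` with `young_kept0` (the `sorted_values` block), `Mults` by `Mem.SameExcept.eqOn` of `[R + 28H, R + 30H)`.
      -- `Frame.step` / `Cur.step` do the same in one line each when there is ONE footprint from a cut point `v`.
-/
import Vorbis.Spec.StartDecoderA
import Vorbis.Spec.Alloc
namespace Vorbis.Spec.StartDecoder
open X86 X86.User Asan

set_option maxRecDepth 100000
set_option maxHeartbeats 4000000

/-! ### 1. Where things are -/

/-- **`*f` does not meet the function's own stack** `[RA − 1888, RA + 8)`: it lies inside ONE live object of the callers' frames
(above the return-address slot: `Frame.callers`) or of `A.2` (off the stack region: `ShadowInv.off`). WHEN: once per segment, from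
the entry assertion (`hfr := h.frame`, `hh := h.cur.hand`); `Pos.of` packs it. -/
theorem f_off_frame {u₀ : State} {g : Ghost} {pc : Word} {A : Arena × List Obj} {v : State} (hfr : Frame u₀ g pc A v)
    (hh : g.Hand A) : g.f + 1808 ≤ 0x700000 ∨ 0x800000 ≤ g.f ∨ g.RA + 8 ≤ g.f := by
  obtain ⟨o, ho, h1, h2⟩ := hh.obj
  simp only [voff] at h2
  rcases List.mem_append.mp ho with hs | hoth
  · right
    right
    unfold stackObjs at hs
    obtain ⟨bF, hbF, hin⟩ := List.mem_flatMap.mp hs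
    have hbF' : bF ∈ g.frames' := by
      unfold Ghost.frames'
      exact List.mem_cons_of_mem _ hbF
    obtain ⟨k1, k2, _, _, _⟩ := hfr.shadow.stack.active bF hbF'
    obtain ⟨g1, _⟩ := FrameLayout.objsAt_gran k1 k2 hin
    have hc := hfr.callers bF hbF
    have h8 := hfr.ra.1
    have e1 : o.gLo = o.base / 8 := rfl
    omega
  · have hoff := hfr.shadow.off o hoth
    unfold OffStack at hoff
    omega

/-- The same fact in the spelling of the worker of start_decoder.C4: `*f` above the return-address slot, or off the stack region. -/
theorem obj_above {u₀ : State} {g : Ghost} {pc : Word} {A : Arena × List Obj} {v : State} (hfr : Frame u₀ g pc A v)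
    (hh : g.Hand A) : g.RA + 8 ≤ g.f ∨ g.f + 1808 ≤ 0x700000 ∨ 0x800000 ≤ g.f := by
  have := f_off_frame hfr hh
  omega

/-- **Where things are** (memory-independent, the same all through a segment; after an allocation: `Pos.grow`): the steady stack
pointer against the return-address slot, `*f` against the own stack frame, the arena's buffer (in the data space, off the stack
region, `*f` and the fixed objects outside it), the global `log2_4`; the arena of the entry has the same buffer. -/
structure Pos (g : Ghost) (A : Arena × List Obj) : Prop where
  r_eq : g.R + 1480 = g.RA
  ra_lo : 0x700000 + 1888 ≤ g.RA
  ra_hi : g.RA + 8 ≤ 0x800000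
  f_lo : 0x400000 ≤ g.f
  f_hi : g.f + 1808 ≤ 0xC00000
  f_stack : g.f + 1808 ≤ 0x700000 ∨ 0x800000 ≤ g.f ∨ g.RA + 8 ≤ g.f
  objOut : g.f + 1808 ≤ A.1.B ∨ A.1.B + A.1.L ≤ g.f
  log2Out : 0x120650 ≤ A.1.B ∨ A.1.B + A.1.L ≤ 0x120640
  ar_lo : 0x100000 ≤ A.1.B
  ar_hi : A.1.B + A.1.L ≤ 0xC00000
  ar_stack : A.1.B + A.1.L ≤ 0x700000 ∨ 0x800000 ≤ A.1.B
  fixedOut : ∀ C, C ∈ fixedBlocks g.len → C.base + C.size ≤ A.1.B ∨ A.1.B + A.1.L ≤ C.base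
  extB : g.A0.1.B = A.1.B
  extL : g.A0.1.L = A.1.L

/-- **The positions at a cut point of the codebook loop.** WHEN: first line of a segment's proof, `Pos.of h.frame h.cur`. -/
theorem Pos.of {u₀ : State} {g : Ghost} {pc : Word} {i : Nat} {A2 A3 Ai : Arena} {A : Arena × List Obj} {v : State}
    (hfr : Frame u₀ g pc A v) (hc : Cur g i A2 A3 Ai A v) : Pos g A := by
  have hh := hc.hand
  have hr := hfr.r_eq.1
  obtain ⟨_, r2, r3⟩ := hfr.ra
  have hobr := hc.sd.bits.OBR
  have hout := hh.objOut
  have a1 := hc.sd.arena.AR1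
  have a1x := hc.sd.arena.AR1x
  simp only [steady, depth, voff] at hr r2 hobr hout
  have hlog := hh.outside ⟨0x120640, 16⟩ (by
    unfold fixedBlocks globalBlocks
    exact List.mem_cons_of_mem _ (List.mem_cons_of_mem _ (List.mem_cons_of_mem _ (List.mem_cons_of_mem _
      List.mem_cons_self))))
  simp only [] at hlog
  exact
    { r_eq := hr
      ra_lo := r2
      ra_hi := r3
      f_lo := hobr.1
      f_hi := hobr.2
      f_stack := f_off_frame hfr hh
      objOut := hout
      log2Out := by omega
      ar_lo := a1x.1
      ar_hi := a1.2.2.2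
      ar_stack := a1x.2
      fixedOut := hh.outside
      extB := hfr.ext.B.symm
      extL := hfr.ext.L.symm }

/-- **The positions after an allocator call**: `B` and `L` never change (`Arena.Extends`: `A.1.extends_pushSetup n`,
`.extends_pushTemp n`, `.extends_withTemp T' rest`). -/
theorem Pos.grow {g : Ghost} {A A' : Arena × List Obj} (h : Pos g A) (hext : A.1.Extends A'.1) : Pos g A' := by
  obtain ⟨p1, p2, p3, p4, p5, p6, p7, p8, p9, p10, p11, p12, p13, p14⟩ := h
  have eB := hext.B
  have eL := hext.L
  refine ⟨p1, p2, p3, p4, p5, p6, ?_, ?_, ?_, ?_, ?_, ?_, ?_, ?_⟩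
  · rw [eB, eL]
    exact p7
  · rw [eB, eL]
    exact p8
  · rw [eB]
    exact p9
  · rw [eB, eL]
    exact p10
  · rw [eB, eL]
    exact p11
  · rw [eB, eL]
    exact p12
  · rw [eB]
    exact p13
  · rw [eL]
    exact p14

/-! ### 2. The memory-dependent part of `Frame` + `Cur` -/

/-- **The memory-dependent part of `Frame` and of CUR(i)** for the memory `m` and the ghost arena `A`: the slots of `Frame`, the
shadow layer, SH7, the function's footprint; `SDw 3`, the record with the ages, ZF(i+1), `i < codebook_count`, the two slots of
`Cur`. (Not here: rip, rsp, `CodeOK`, `abiInv`, r14 — the walker has them at every state; `Hand`, `offText`, `ext`, `callers`,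
`entry` — memory-independent, taken from the entry assertion by `MInv.frame` / `MInv.cur`.) -/
structure MInv (g : Ghost) (i : Nat) (A2 A3 Ai : Arena) (A : Arena × List Obj) (m : Mem) : Prop where
  shadowIdx : m.u64 (g.R + 8) = (g.R + 0x50) / 8
  saved_rbx : m.u64 (g.R + 0x598) = (g.e.reg .rbx).toNat
  saved_rbp : m.u64 (g.R + 0x5a0) = (g.e.reg .rbp).toNat
  saved_r12 : m.u64 (g.R + 0x5a8) = (g.e.reg .r12).toNat
  saved_r13 : m.u64 (g.R + 0x5b0) = (g.e.reg .r13).toNat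
  saved_r14 : m.u64 (g.R + 0x5b8) = (g.e.reg .r14).toNat
  saved_r15 : m.u64 (g.R + 0x5c0) = (g.e.reg .r15).toNat
  saved_ra : m.u64 (g.R + 0x5c8) = g.ret.toNat
  shadow : ShadowInv A.2 g.frames' g.R m
  sh7 : Log2_4In m
  same : Mem.SameExcept (footprint g) g.e.mem m
  sd : SDw g.len 3 A (g.Blk A) (g.Live A) m g.f g.R
  ages : BookTrans A2 A3 Ai A.1 m g.f i
  zf : ZF m (stb_vorbis.codebooks m g.f) (stb_vorbis.codebook_count m g.f).toNat (i + 1)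
  lt : (i : Int) < stb_vorbis.codebook_count m g.f
  slot_f : m.u64 (g.R + 0x18) = g.f
  slot_i : m.u32 (g.R + 0x30) = i

/-- **From a cut point**: the memory-dependent part of its `Frame` and `Cur`. WHEN: second line of a segment's proof. -/
theorem MInv.of {u₀ : State} {g : Ghost} {pc : Word} {i : Nat} {A2 A3 Ai : Arena} {A : Arena × List Obj} {v : State}
    (hfr : Frame u₀ g pc A v) (hc : Cur g i A2 A3 Ai A v) : MInv g i A2 A3 Ai A v.mem :=
  { shadowIdx := hfr.shadowIdx
    saved_rbx := hfr.saved_rbx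
    saved_rbp := hfr.saved_rbp
    saved_r12 := hfr.saved_r12
    saved_r13 := hfr.saved_r13
    saved_r14 := hfr.saved_r14
    saved_r15 := hfr.saved_r15
    saved_ra := hfr.saved_ra
    shadow := hfr.shadow
    sh7 := hfr.sh7
    same := hfr.same
    sd := hc.sd
    ages := hc.ages
    zf := hc.zf
    lt := hc.lt
    slot_f := hc.slot_f
    slot_i := hc.slot_i }

/-- **Back to `Frame`** at the state `s` (a call return, an exit of the segment) from `MInv` of its memory and the walker's facts
(`w_rip`, `w_rsp` rewritten to `addr g.R`, `CodeOK` by `v_code` / `CodeOK.of_eqOn`, `abiInv` by `v_inv`). `hfr`: ANY `Frame` of the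
activation (the entry assertion's) — only its memory-independent fields are used; `hoff`, `hext`: for the ghost arena of `s`
(unchanged arena: `hfr.offText`, `hfr.ext`). -/
theorem MInv.frame {u₀ : State} {g : Ghost} {i : Nat} {A2 A3 Ai : Arena} {A0 A : Arena × List Obj} {v s : State}
    {pc pc' : Word} (h : MInv g i A2 A3 Ai A s.mem) (hfr : Frame u₀ g pc A0 v) (hrip : s.rip = pc')
    (hrsp : s.reg .rsp = addr g.R) (hcode : CodeOK u₀ s.mem) (hinv : abiInv s) (hoff : ∀ o, o ∈ A.2 → L.textHi ≤ o.base)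
    (hext : g.A0.1.Extends A.1) : Frame u₀ g pc' A s :=
  { entry := hfr.entry
    rip := hrip
    rsp := hrsp
    shadowIdx := h.shadowIdx
    saved_rbx := h.saved_rbx
    saved_rbp := h.saved_rbp
    saved_r12 := h.saved_r12
    saved_r13 := h.saved_r13
    saved_r14 := h.saved_r14
    saved_r15 := h.saved_r15
    saved_ra := h.saved_ra
    code := hcode
    inv := hinv
    shadow := h.shadow
    offText := hoff
    ext := hext
    callers := hfr.callers
    sh7 := h.sh7
    same := h.same }

/-- **Back to CUR(i)** at the state `s` from `MInv` of its memory, `Hand` for its ghost arena and r14 = `cb(i)` (the walker's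
`w_r14`, with `g.cb s.mem i` rewritten by the second component of `MInv.step`). -/
theorem MInv.cur {g : Ghost} {i : Nat} {A2 A3 Ai : Arena} {A : Arena × List Obj} {s : State}
    (h : MInv g i A2 A3 Ai A s.mem) (hh : g.Hand A) (hr14 : s.reg .r14 = addr (g.cb s.mem i)) : Cur g i A2 A3 Ai A s :=
  { sd := h.sd
    hand := hh
    ages := h.ages
    zf := h.zf
    lt := h.lt
    slot_f := h.slot_f
    slot_i := h.slot_i
    r14 := hr14 }

/-- **Where the struct `cb(i)` is**: inside the arena's buffer, off the stack region, in the data space. WHEN: for the `u_omega`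
side goals of a window of the struct (`compute_accelerated_huffman`'s `[c + 48, c + 2096)`, a field store), and for `toNat_addr`. -/
theorem MInv.c_where {g : Ghost} {i : Nat} {A2 A3 Ai : Arena} {A : Arena × List Obj} {m : Mem}
    (h : MInv g i A2 A3 Ai A m) :
    (A.1.B ≤ g.cb m i ∧ g.cb m i + 2120 ≤ A.1.B + A.1.L) ∧ (g.cb m i + 2120 ≤ 0x700000 ∨ 0x800000 ≤ g.cb m i) ∧
      g.cb m i + 2120 ≤ 0xC00000 := by
  have ha : ArenaOK A.1 A.2 m g.f := h.sd.arena
  have hcbOK := h.ages.cbOK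
  have hcbA : A.1.Blk (codebooksBlock m g.f) := hcbOK.F2.mono h.ages.exti
  have hci := hcbOK.cb_in i h.lt
  have hcin := arena_inside ha hcbA
  have hcst := ha.blk_off_stack hcbA
  have hins := ha.blkOK.inside _ hcbA
  unfold Ghost.cb
  simp only [vblock, voff] at hci hcin hcst hins
  omega

/-! ### 3. What a step may write -/

/-- **A window allocated since the head of the iteration** (or never: a temp block): inside the arena's buffer, and off every
setup block of the snapshot `Ai` — the `lengths` array (dense: `ArenaOK.old_disjoint_since` with `LengthsAt.dense_block`; sparse:
a temp block, `ArenaOK.setup_temp_disjoint`), `codewords`, `codeword_lengths`, `values`, `sorted_codewords`, `sorted_values`,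
`multiplicands`, `mults` of book `i`. -/
def Young (Ai : Arena) (A : Arena × List Obj) (w : Span) : Prop :=
  A.1.B ≤ w.lo ∧ w.hi ≤ A.1.B + A.1.L ∧ ∀ B, Ai.Blk B → B.base + B.size ≤ w.lo ∨ w.hi ≤ B.base

/-- **A window a step of part C may write, outside the arena's young blocks**: the stack below the steady rsp (a pushed return
address, a callee's frame: at most 408 bytes); the locals of the own frame that `Frame` / `Cur` do not read (`[R + 28H, R + 30H)` =
`mults`, `[R + 34H, R + 598H)` = `last`, `len`, … and the protected frame's objects); the struct `cb(i)` at `c` (any of its 2120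
bytes); the reader's fields of `*f` (the five windows of `Reader.winsBits f`, of which `[f + 136, f + 144)` = `eof`, `error` is also
`error`'s footprint). -/
def OkWin0 (g : Ghost) (c : Nat) (w : Span) : Prop :=
  (g.R - 408 ≤ w.lo ∧ w.hi ≤ g.R) ∨
  (g.R + 0x28 ≤ w.lo ∧ w.hi ≤ g.R + 0x30) ∨
  (g.R + 0x34 ≤ w.lo ∧ w.hi ≤ g.R + 0x598) ∨
  (c ≤ w.lo ∧ w.hi ≤ c + 2120) ∨
  (g.f + 48 ≤ w.lo ∧ w.hi ≤ g.f + 56) ∨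
  (g.f + 84 ≤ w.lo ∧ w.hi ≤ g.f + 96) ∨
  (g.f + 136 ≤ w.lo ∧ w.hi ≤ g.f + 144) ∨
  (g.f + 1484 ≤ w.lo ∧ w.hi ≤ g.f + 1749) ∨
  (g.f + 1752 ≤ w.lo ∧ w.hi ≤ g.f + 1784)

/-- **A window a step of part C may write while the ghost arena stays**: `OkWin0`, or a window in a young block (`Young`). -/
def OkWin (g : Ghost) (Ai : Arena) (A : Arena × List Obj) (c : Nat) (w : Span) : Prop :=
  OkWin0 g c w ∨ Young Ai A w

/-- **A window an allocator call may write besides**: `setup_memory_required` `[f + 8, f + 12)`, `setup_offset` / `temp_offset`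
`[f + 128, f + 136)`, shadow bytes of the arena's buffer (`shadowSpan p (p + n)` of the new / released block). -/
def OkWinA (g : Ghost) (Ai : Arena) (A : Arena × List Obj) (c : Nat) (w : Span) : Prop :=
  OkWin g Ai A c w ∨
  ((g.f + 8 ≤ w.lo ∧ w.hi ≤ g.f + 12) ∨ (g.f + 16 ≤ w.lo ∧ w.hi ≤ g.f + 20)) ∨
  (g.f + 128 ≤ w.lo ∧ w.hi ≤ g.f + 136) ∨
  (0xC00000 + A.1.B / 8 ≤ w.lo ∧ w.hi ≤ 0xC00000 + (A.1.B + A.1.L + 7) / 8)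

/-- A quiet window is a window. -/
theorem OkWin0.ok {g : Ghost} {Ai : Arena} {A : Arena × List Obj} {c : Nat} {w : Span} (h : OkWin0 g c w) : OkWin g Ai A c w :=
  Or.inl h

/-- A window of a step without allocator is a window of the general step. -/
theorem OkWin.okA {g : Ghost} {Ai : Arena} {A : Arena × List Obj} {c : Nat} {w : Span} (h : OkWin g Ai A c w) :
    OkWinA g Ai A c w :=
  Or.inl h

/-- The windows of `*f` that a step (allocator calls included) keeps. -/
def keepWins : Wins := [(0, 8), (12, 16), (20, 48), (56, 84), (96, 128), (144, 1484), (1749, 1752), (1784, 1808)]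

/-! ### 4. THE lemma -/

/-- **THE CARRY LEMMA OF PART C**: `MInv` over a change of the memory whose every window is `OkWinA`, while the ghost arena goes
from `A` to `A'` (`hext`; the same arena: `Arena.Extends.refl _`). The facts about the NEW arena and shadow are the callee's post
(`ha'`, `hsh'`) or the old ones transported (`MInv.step` does that); `hx`: the non-arena blocks (`*f`, the fixed objects) are live
for the new object list; `hb`: `Bits f` from the reader's post, or `bits_kept`. Also: `cb(i)` is the same address.
USE `MInv.step` / `.push` / `.alloc` / `.rearena`; this is their common proof. -/
theorem MInv.move {g : Ghost} {i : Nat} {A2 A3 Ai : Arena} {A A' : Arena × List Obj} {c : Nat} {m m' : Mem} {ws : List Span}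
    (h : MInv g i A2 A3 Ai A m) (hp : Pos g A) (hc : g.cb m i = c) (hs : Mem.SameExcept ws m m')
    (hok : ∀ w, w ∈ ws → OkWinA g Ai A c w) (hext : A.1.Extends A'.1) (ha' : ArenaOK A'.1 A'.2 m' g.f)
    (hsh' : ShadowInv A'.2 g.frames' g.R m') (hx : BlkLive (listBlk g.extra) (g.Live A'))
    (hb : Bits (g.Blk A') g.len m' g.f) : MInv g i A2 A3 Ai A' m' ∧ g.cb m' i = c := by
  obtain ⟨p1, p2, p3, p4, p5, p6, p7, p8, p9, p10, p11, p12, p13, p14⟩ := hp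
  have ha : ArenaOK A.1 A.2 m g.f := h.sd.arena
  have hcbOK := h.ages.cbOK
  have hcbA : A.1.Blk (codebooksBlock m g.f) := hcbOK.F2.mono h.ages.exti
  have hci := hcbOK.cb_in i h.lt
  have hcin := arena_inside ha hcbA
  have hcst := ha.blk_off_stack hcbA
  have hcwr := ha.blkOK.no_wrap hcbA
  have hcb := hc
  unfold Ghost.cb at hcb
  rw [hcb] at hci
  simp only [vblock, voff] at hci hcin hcst hcwr
  -- every window, with the definitions opened (13 alternatives)
  have hwin : ∀ w, w ∈ ws →
      (g.R - 408 ≤ w.lo ∧ w.hi ≤ g.R) ∨ (g.R + 0x28 ≤ w.lo ∧ w.hi ≤ g.R + 0x30) ∨ (g.R + 0x34 ≤ w.lo ∧ w.hi ≤ g.R + 0x598) ∨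
      (c ≤ w.lo ∧ w.hi ≤ c + 2120) ∨ (g.f + 48 ≤ w.lo ∧ w.hi ≤ g.f + 56) ∨ (g.f + 84 ≤ w.lo ∧ w.hi ≤ g.f + 96) ∨
      (g.f + 136 ≤ w.lo ∧ w.hi ≤ g.f + 144) ∨ (g.f + 1484 ≤ w.lo ∧ w.hi ≤ g.f + 1749) ∨
      (g.f + 1752 ≤ w.lo ∧ w.hi ≤ g.f + 1784) ∨ Young Ai A w ∨
      ((g.f + 8 ≤ w.lo ∧ w.hi ≤ g.f + 12) ∨ (g.f + 16 ≤ w.lo ∧ w.hi ≤ g.f + 20)) ∨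
      (g.f + 128 ≤ w.lo ∧ w.hi ≤ g.f + 136) ∨
      (0xC00000 + A.1.B / 8 ≤ w.lo ∧ w.hi ≤ 0xC00000 + (A.1.B + A.1.L + 7) / 8) := by
    intro w hw
    have k := hok w hw
    unfold OkWinA OkWin OkWin0 at k
    rcases k with (k | k) | k
    · rcases k with k | k | k | k | k | k | k | k | k
      · exact Or.inl k
      · exact Or.inr (Or.inl k)
      · exact Or.inr (Or.inr (Or.inl k))
      · exact Or.inr (Or.inr (Or.inr (Or.inl k)))
      · exact Or.inr (Or.inr (Or.inr (Or.inr (Or.inl k))))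
      · exact Or.inr (Or.inr (Or.inr (Or.inr (Or.inr (Or.inl k)))))
      · exact Or.inr (Or.inr (Or.inr (Or.inr (Or.inr (Or.inr (Or.inl k))))))
      · exact Or.inr (Or.inr (Or.inr (Or.inr (Or.inr (Or.inr (Or.inr (Or.inl k)))))))
      · exact Or.inr (Or.inr (Or.inr (Or.inr (Or.inr (Or.inr (Or.inr (Or.inr (Or.inl k))))))))
    · exact Or.inr (Or.inr (Or.inr (Or.inr (Or.inr (Or.inr (Or.inr (Or.inr (Or.inr (Or.inl k)))))))))
    · exact Or.inr (Or.inr (Or.inr (Or.inr (Or.inr (Or.inr (Or.inr (Or.inr (Or.inr (Or.inr k)))))))))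
  -- a region off the arena's buffer, off the stack part a step writes, off the written fields of `*f`, off the shadow
  have eqOff : ∀ lo hi : Nat, hi ≤ 0xC00000 → (hi ≤ A.1.B ∨ A.1.B + A.1.L ≤ lo) →
      (hi ≤ g.R - 408 ∨ g.R + 0x598 ≤ lo ∨ (g.R ≤ lo ∧ hi ≤ g.R + 0x28) ∨ (g.R + 0x30 ≤ lo ∧ hi ≤ g.R + 0x34)) →
      (hi ≤ g.f ∨ g.f + 1808 ≤ lo ∨ (g.f ≤ lo ∧ hi ≤ g.f + 8) ∨ (g.f + 12 ≤ lo ∧ hi ≤ g.f + 16) ∨ (g.f + 20 ≤ lo ∧ hi ≤ g.f + 48) ∨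
        (g.f + 56 ≤ lo ∧ hi ≤ g.f + 84) ∨ (g.f + 96 ≤ lo ∧ hi ≤ g.f + 128) ∨ (g.f + 144 ≤ lo ∧ hi ≤ g.f + 1484) ∨
        (g.f + 1749 ≤ lo ∧ hi ≤ g.f + 1752) ∨ (g.f + 1784 ≤ lo ∧ hi ≤ g.f + 1808)) → Mem.EqOn lo hi m m' := by
    intro lo hi q1 q2 q3 q4
    apply hs.eqOn
    intro w hw
    rcases hwin w hw with k | k | k | k | k | k | k | k | k | k | k | k | k
    · omega
    · omega
    · omega
    · omega
    · omega
    · omega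
    · omega
    · omega
    · omega
    · obtain ⟨y1, y2, _⟩ := k
      omega
    · omega
    · omega
    · omega
  -- the own frame above rsp: the three parts that are read
  have hstk1 : Mem.EqOn g.R (g.R + 0x28) m m' := eqOff _ _ (by omega) (by omega) (by omega) (by omega)
  have hstk2 : Mem.EqOn (g.R + 0x30) (g.R + 0x34) m m' := eqOff _ _ (by omega) (by omega) (by omega) (by omega)
  have hstk3 : Mem.EqOn (g.R + 0x598) (g.R + 0x5d0) m m' := eqOff _ _ (by omega) (by omega) (by omega) (by omega)
  have hobj : ObjEq keepWins m g.f m' g.f := by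
    apply ObjEq.of_eqOn
    · intro w hw
      simp only [keepWins, List.mem_cons, List.mem_nil_iff, or_false] at hw
      rcases hw with rfl | rfl | rfl | rfl | rfl | rfl | rfl | rfl <;> simp only [] <;> omega
    · intro w hw
      simp only [keepWins, List.mem_cons, List.mem_nil_iff, or_false] at hw
      rcases hw with rfl | rfl | rfl | rfl | rfl | rfl | rfl | rfl
      · exact eqOff _ _ (by omega) (by omega) (by omega) (by omega)
      · exact eqOff _ _ (by omega) (by omega) (by omega) (by omega)
      · exact eqOff _ _ (by omega) (by omega) (by omega) (by omega)
      · exact eqOff _ _ (by omega) (by omega) (by omega) (by omega)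
      · exact eqOff _ _ (by omega) (by omega) (by omega) (by omega)
      · exact eqOff _ _ (by omega) (by omega) (by omega) (by omega)
      · exact eqOff _ _ (by omega) (by omega) (by omega) (by omega)
      · exact eqOff _ _ (by omega) (by omega) (by omega) (by omega)
  have ecnt : stb_vorbis.codebook_count m' g.f = stb_vorbis.codebook_count m g.f := by
    simp only [vacc, voff]
    exact hobj.i32 160 (by decide)
  have ecbs : stb_vorbis.codebooks m' g.f = stb_vorbis.codebooks m g.f := by
    simp only [vacc, voff]
    exact hobj.u64 168 (by decide)
  -- a block of the head-of-iteration snapshot off the struct `cb(i)` is kept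
  have keptB : ∀ B : Block, Ai.Blk B → (B.base + B.size ≤ c ∨ c + 2120 ≤ B.base) → B.Kept m m' := by
    intro B hBi hd
    have hB : A.1.Blk B := hBi.mono h.ages.exti
    have hi := arena_inside ha hB
    have hst := ha.blk_off_stack hB
    apply Block.Kept.of_sameExcept hs _ (ha.blkOK.no_wrap hB)
    intro w hw
    rcases hwin w hw with k | k | k | k | k | k | k | k | k | k | k | k | k
    · omega
    · omega
    · omega
    · omega
    · omega
    · omega
    · omega
    · omega
    · omega
    · exact k.2.2 B hBi
    · omega
    · omega
    · omega
  -- a part of the codebooks block off the struct `cb(i)` is kept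
  have keptC : ∀ B : Block, (codebooksBlock m g.f).contains B.base B.size → (B.base + B.size ≤ c ∨ c + 2120 ≤ B.base) →
      B.Kept m m' := by
    intro B hB hd
    simp only [vblock, voff] at hB
    apply Block.Kept.of_sameExcept hs _ (by omega)
    intro w hw
    rcases hwin w hw with k | k | k | k | k | k | k | k | k | k | k | k | k
    · omega
    · omega
    · omega
    · omega
    · omega
    · omega
    · omega
    · omega
    · omega
    · have hy := k.2.2 _ hcbOK.F2
      simp only [vblock, voff] at hy
      omega
    · omega
    · omega
    · omega
  -- the new block predicate
  have hblk : ∀ B, g.Blk A B → g.Blk A' B := fun B hB => runBlk_mono hext (fun _ hm => hm) B hB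
  have hmv : MInv g i A2 A3 Ai A' m' := by
    refine
      { shadowIdx := ?_
        saved_rbx := ?_
        saved_rbp := ?_
        saved_r12 := ?_
        saved_r13 := ?_
        saved_r14 := ?_
        saved_r15 := ?_
        saved_ra := ?_
        shadow := hsh'
        sh7 := ?sh7
        same := ?same
        sd := ?sd
        ages := ?ages
        zf := ?zf
        lt := ?_
        slot_f := ?_
        slot_i := ?_ }
    · rw [hstk1.u64 _ (by omega) (by omega) (by omega)]
      exact h.shadowIdx
    · rw [hstk3.u64 _ (by omega) (by omega) (by omega)]
      exact h.saved_rbx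
    · rw [hstk3.u64 _ (by omega) (by omega) (by omega)]
      exact h.saved_rbp
    · rw [hstk3.u64 _ (by omega) (by omega) (by omega)]
      exact h.saved_r12
    · rw [hstk3.u64 _ (by omega) (by omega) (by omega)]
      exact h.saved_r13
    · rw [hstk3.u64 _ (by omega) (by omega) (by omega)]
      exact h.saved_r14
    · rw [hstk3.u64 _ (by omega) (by omega) (by omega)]
      exact h.saved_r15
    · rw [hstk3.u64 _ (by omega) (by omega) (by omega)]
      exact h.saved_ra
    case sh7 =>
      intro j hj
      have e : (UInt64.ofNat (Vorbis.Globals.log2_4.beg + j)).toNat = 0x120640 + j := by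
        show (addr (0x120640 + j)).toNat = 0x120640 + j
        exact toNat_addr _ (by omega)
      have hE : Mem.EqOn 0x120640 0x120650 m m' := eqOff _ _ (by omega) (by omega) (by omega) (by omega)
      rw [hE.readLE _ 1 (by rw [e]; omega) (by rw [e]; omega) (by rw [e]; omega)]
      exact h.sh7 j hj
    case same =>
      apply h.same.step_same hs
      intro w hw a h1 h2
      rcases hwin w hw with k | k | k | k | k | k | k | k | k | k | k | k | k
      · refine ⟨⟨g.RA - depth, g.RA⟩, List.mem_cons_self, ?_, ?_⟩
        · simp only [depth] at h1 h2 ⊢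
          omega
        · simp only [] at h1 h2 ⊢
          omega
      · refine ⟨⟨g.RA - depth, g.RA⟩, List.mem_cons_self, ?_, ?_⟩
        · simp only [depth] at h1 h2 ⊢
          omega
        · simp only [] at h1 h2 ⊢
          omega
      · refine ⟨⟨g.RA - depth, g.RA⟩, List.mem_cons_self, ?_, ?_⟩
        · simp only [depth] at h1 h2 ⊢
          omega
        · simp only [] at h1 h2 ⊢
          omega
      · refine ⟨⟨g.A0.1.B, g.A0.1.B + g.A0.1.L⟩, ?_, ?_, ?_⟩
        · unfold footprint writes
          exact List.mem_cons_of_mem _ (List.mem_cons_of_mem _ (List.mem_cons_of_mem _ List.mem_cons_self))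
        · simp only [] at h1 h2 ⊢
          omega
        · simp only [] at h1 h2 ⊢
          omega
      · refine ⟨(objBlock g.f).span, ?_, ?_, ?_⟩
        · unfold footprint writes
          exact List.mem_cons_of_mem _ List.mem_cons_self
        · simp only [vblock, voff] at h1 h2 ⊢
          omega
        · simp only [vblock, voff] at h1 h2 ⊢
          omega
      · refine ⟨(objBlock g.f).span, ?_, ?_, ?_⟩
        · unfold footprint writes
          exact List.mem_cons_of_mem _ List.mem_cons_self
        · simp only [vblock, voff] at h1 h2 ⊢
          omega
        · simp only [vblock, voff] at h1 h2 ⊢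
          omega
      · refine ⟨(objBlock g.f).span, ?_, ?_, ?_⟩
        · unfold footprint writes
          exact List.mem_cons_of_mem _ List.mem_cons_self
        · simp only [vblock, voff] at h1 h2 ⊢
          omega
        · simp only [vblock, voff] at h1 h2 ⊢
          omega
      · refine ⟨(objBlock g.f).span, ?_, ?_, ?_⟩
        · unfold footprint writes
          exact List.mem_cons_of_mem _ List.mem_cons_self
        · simp only [vblock, voff] at h1 h2 ⊢
          omega
        · simp only [vblock, voff] at h1 h2 ⊢
          omega
      · refine ⟨(objBlock g.f).span, ?_, ?_, ?_⟩
        · unfold footprint writes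
          exact List.mem_cons_of_mem _ List.mem_cons_self
        · simp only [vblock, voff] at h1 h2 ⊢
          omega
        · simp only [vblock, voff] at h1 h2 ⊢
          omega
      · obtain ⟨y1, y2, _⟩ := k
        refine ⟨⟨g.A0.1.B, g.A0.1.B + g.A0.1.L⟩, ?_, ?_, ?_⟩
        · unfold footprint writes
          exact List.mem_cons_of_mem _ (List.mem_cons_of_mem _ (List.mem_cons_of_mem _ List.mem_cons_self))
        · simp only [] at h1 h2 ⊢
          omega
        · simp only [] at h1 h2 ⊢
          omega
      · refine ⟨(objBlock g.f).span, ?_, ?_, ?_⟩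
        · unfold footprint writes
          exact List.mem_cons_of_mem _ List.mem_cons_self
        · simp only [vblock, voff] at h1 h2 ⊢
          omega
        · simp only [vblock, voff] at h1 h2 ⊢
          omega
      · refine ⟨(objBlock g.f).span, ?_, ?_, ?_⟩
        · unfold footprint writes
          exact List.mem_cons_of_mem _ List.mem_cons_self
        · simp only [vblock, voff] at h1 h2 ⊢
          omega
        · simp only [vblock, voff] at h1 h2 ⊢
          omega
      · refine ⟨shadowSpan g.A0.1.B (g.A0.1.B + g.A0.1.L), ?_, ?_, ?_⟩
        · unfold footprint writes
          exact List.mem_cons_of_mem _ (List.mem_cons_of_mem _ (List.mem_cons_of_mem _ (List.mem_cons_of_mem _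
            List.mem_cons_self)))
        · simp only [shadowSpan] at h1 h2 ⊢
          omega
        · simp only [shadowSpan] at h1 h2 ⊢
          omega
    case sd =>
      refine
        { env := ?env
          frame := h.sd.frame.frame (Mem.EqOn.mono hstk1 (by omega) (by omega)) (by omega)
          arena := ha'
          setups := fun B hB => up g A' B hB
          bits := hb
          first := ?_
          discard0 := ?_
          header := fun h1 => (h.sd.header h1).transfer (hobj.sub (by decide))
          cb0 := fun h3 => ⟨(h.sd.cb0 h3).1.transfer (hobj.sub (by decide)) (fun B _ hB => hblk B hB), ?_⟩
          rest := ?_ }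
      case env =>
        refine ⟨hsh'.covers, ?_, ?_⟩
        · have hxok : BlkOK (listBlk g.extra) := h.sd.env.ok.sub (fun B hB => runBlk_extra hB)
          apply ha'.runBlk_ok hxok
          intro C hC
          rw [hext.B, hext.L]
          rcases List.mem_cons.mp hC with rfl | hm
          · simp only [vblock, voff]
            exact p7
          · exact p12 C hm
        · exact ha'.runBlk_live (fun o ho => List.mem_append_right _ ho) hx
      · have := h.sd.first
        simp only [vacc, voff] at this ⊢
        rw [hobj.u8 1749 (by decide)]
        exact this
      · have := h.sd.discard0
        simp only [vacc, voff] at this ⊢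
        rw [hobj.i32 1784 (by decide)]
        exact this
      · rw [ecbs]
        exact (h.sd.cb0 h3).2
      · have hr := h.sd.rest
        unfold RestZero at hr ⊢
        apply hr.frame _ (by simp only [voff]; omega)
        have e3 : restFrom 3 = 176 := by decide
        rw [e3]
        simp only [voff]
        exact eqOff _ _ (by omega) (by omega) (by omega) (by omega)
    case ages =>
      apply BookTrans.grow _ hext
      apply h.ages.frame (hobj.sub (by decide))
      · intro B hR
        have hB : A2.Blk B := h.ages.comment.reads_blk hR
        have h3 : A3.Extends A.1 := h.ages.ext3.trans h.ages.exti
        have h2 : A2.Extends A.1 := h.ages.ext2.trans h3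
        have hd := ha.old_disjoint_since h2 hB (h.ages.F2.mono h3)
        simp only [vblock, voff] at hd
        apply keptB B (h.ages.up2 hB)
        omega
      · intro j hj
        have hlj : (j : Int) < stb_vorbis.codebook_count m g.f := by
          have := h.lt
          omega
        have hcj := hcbOK.cb_in j hlj
        have hd := CodebooksOK.cb_disjoint m g.f j i (by omega)
        rw [hcb] at hd
        apply keptC _ hcj
        simp only [vblock, voff] at hd ⊢
        omega
      · intro j hj hse
        have h3 : A3.Extends A.1 := h.ages.ext3.trans h.ages.exti
        have hSi : Since A3 Ai (Codebook.svBlock m (stb_vorbis.codebooks_at m g.f j)) := (h.ages.books j hj).K4.sv hse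
        have hS : Since A3 A.1 (Codebook.svBlock m (stb_vorbis.codebooks_at m g.f j)) := hSi.mono h.ages.exti
        have hd := ha.old_disjoint_since h3 h.ages.F2.1 hS
        simp only [vblock, voff] at hd
        apply keptB _ hSi.1
        simp only [vblock, voff]
        omega
    case zf =>
      rw [ecbs, ecnt]
      have hz := h.zf
      unfold ZF ZeroFill at hz ⊢
      intro j hj
      have hzj := hz j hj
      have hcb' := hcb
      simp only [stb_vorbis.codebooks_at, voff] at hcb'
      simp only [voff] at hj hzj ⊢
      have hK := keptC ⟨c + 2120, stb_vorbis.codebooks m g.f + 2120 * (stb_vorbis.codebook_count m g.f).toNat - (c + 2120)⟩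
        (by simp only [vblock, voff]; omega) (by simp only []; omega)
      have e8 : m'.u8 (stb_vorbis.codebooks m g.f + 2120 * (i + 1) + j) =
          m.u8 (stb_vorbis.codebooks m g.f + 2120 * (i + 1) + j) := by
        apply hK.u8
        · simp only []
          omega
        · simp only []
          omega
      rw [e8]
      exact hzj
    · rw [ecnt]
      exact h.lt
    · rw [hstk1.u64 _ (by omega) (by omega) (by omega)]
      exact h.slot_f
    · rw [hstk2.u32 _ (by omega) (by omega) (by omega)]
      exact h.slot_i
  refine ⟨hmv, ?_⟩
  unfold Ghost.cb
  simp only [stb_vorbis.codebooks_at]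
  rw [ecbs]
  simp only [stb_vorbis.codebooks_at] at hcb
  exact hcb

/-! ### 5. The instances of the lemma -/

/-- **`Bits f` over a step that writes none of the reader's fields** (a push, a spill, `compute_accelerated_huffman`'s or any
table-filling callee's footprint, a store into the struct or a young block, `error`'s store of `f->error`, an allocator's
footprint): every window lies in the own stack, in the arena's buffer, in `[f + 72, f + 1488)` (`eof`, `error`: `[f + 136, f + 144)`;
the allocator's `[f + 128, f + 136)`), in `[f, f + 48)` (`[f + 8, f + 12)`), or in the shadow. WHEN: the `hb` of `MInv.step` for a
callee that is not a reader (a reader's post gives `Bits` itself). -/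
theorem bits_kept {g : Ghost} {A : Arena × List Obj} {m m' : Mem} {ws : List Span} {Blk : Block → Prop} {len : Nat}
    (hp : Pos g A) (hb : Bits Blk len m g.f) (hs : Mem.SameExcept ws m m')
    (hw : ∀ w, w ∈ ws → (g.R - 408 ≤ w.lo ∧ w.hi ≤ g.R + 0x598) ∨ (A.1.B ≤ w.lo ∧ w.hi ≤ A.1.B + A.1.L) ∨
      (g.f + 72 ≤ w.lo ∧ w.hi ≤ g.f + 1488) ∨ (g.f ≤ w.lo ∧ w.hi ≤ g.f + 48) ∨ 0xC00000 ≤ w.lo) : Bits Blk len m' g.f := by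
  obtain ⟨p1, p2, p3, p4, p5, p6, p7, p8, p9, p10, p11, p12, p13, p14⟩ := hp
  apply hb.frame_fields
  apply Bits.SameFields.of_sameExcept hs
  all_goals
    intro w hwm
    have hk := hw w hwm
    omega

/-- **An arena block off the struct `cb(i)` is kept by a step with quiet windows** (`OkWin0`: no window in a young block) — the
`sorted_values` block of book `i` for `K15.frame` / `BookFields.k4`, the `lengths` array, `codewords`, `multiplicands`, a temp
block read later. `hin`: the block lies in the arena's buffer (`arena_inside`; a temp block: `ArenaOK.temp_range`-style facts);
`hd`: off the struct (`young_off_book` gives both for a block allocated since `Ai`). -/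
theorem blk_kept0 {g : Ghost} {A : Arena × List Obj} {c : Nat} {m m' : Mem} {ws : List Span}
    (hp : Pos g A) (hs : Mem.SameExcept ws m m') (hok : ∀ w, w ∈ ws → OkWin0 g c w)
    {B : Block} (hin : A.1.B ≤ B.base ∧ B.base + B.size ≤ A.1.B + A.1.L) (hd : B.base + B.size ≤ c ∨ c + 2120 ≤ B.base) :
    B.Kept m m' := by
  obtain ⟨p1, p2, p3, p4, p5, p6, p7, p8, p9, p10, p11, p12, p13, p14⟩ := hp
  apply Block.Kept.of_sameExcept hs _ (by omega)
  intro w hw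
  have k := hok w hw
  unfold OkWin0 at k
  omega

/-- **A block allocated since the head of the iteration lies off the struct `cb(i)`** (which is inside the codebooks block, a
block of the snapshot `A3`): the `hin`, `hd` of `blk_kept0`. -/
theorem young_off_book {g : Ghost} {i : Nat} {A2 A3 Ai : Arena} {A : Arena × List Obj} {m : Mem}
    (h : MInv g i A2 A3 Ai A m) {B : Block} (hB : Since Ai A.1 B) :
    (A.1.B ≤ B.base ∧ B.base + B.size ≤ A.1.B + A.1.L) ∧ (B.base + B.size ≤ g.cb m i ∨ g.cb m i + 2120 ≤ B.base) := by
  have ha : ArenaOK A.1 A.2 m g.f := h.sd.arena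
  have hcbOK := h.ages.cbOK
  have hci := hcbOK.cb_in i h.lt
  have hd := ha.old_disjoint_since h.ages.exti hcbOK.F2 hB
  have hin := arena_inside ha hB.1
  unfold Ghost.cb
  simp only [vblock, voff] at hci hd hin
  omega

/-- **A block allocated since the head of the iteration is kept by a step with quiet windows.** -/
theorem young_kept0 {g : Ghost} {i : Nat} {A2 A3 Ai : Arena} {A : Arena × List Obj} {m m' : Mem} {ws : List Span}
    (h : MInv g i A2 A3 Ai A m) (hp : Pos g A) (hs : Mem.SameExcept ws m m') (hok : ∀ w, w ∈ ws → OkWin0 g (g.cb m i) w)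
    {B : Block} (hB : Since Ai A.1 B) : B.Kept m m' := by
  obtain ⟨hin, hd⟩ := young_off_book h hB
  exact blk_kept0 hp hs hok hin hd

/-- **THE STEP WITHOUT ALLOCATOR**: a callee's footprint (`w_same` after `v_after_call`: get_bits, ilog, error, memset, memcpy,
compute_codewords, compute_sorted_huffman, compute_accelerated_huffman, lookup1_values …) or a batch of the walker's stores (`u_same`)
whose every window is `OkWin` keeps `MInv`, and `cb(i)` is the same address. `hc`: `rfl` (or the name `c` the segment gave to
`g.cb v.mem i`); `hun`: no shadow byte written (the callee's post, or `v_untouched`); `hok`: per window, `unfold OkWin OkWin0` /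
`Or.inl`, then `u_omega` (a young block: `Or.inr ⟨_, _, fun B hB => …old_disjoint_since…⟩`); `hb`: the reader's post, or `bits_kept`. -/
theorem MInv.step {g : Ghost} {i : Nat} {A2 A3 Ai : Arena} {A : Arena × List Obj} {c : Nat} {m m' : Mem} {ws : List Span}
    (h : MInv g i A2 A3 Ai A m) (hp : Pos g A) (hc : g.cb m i = c) (hs : Mem.SameExcept ws m m')
    (hun : ShadowUntouched m m') (hok : ∀ w, w ∈ ws → OkWin g Ai A c w) (hb : Bits (g.Blk A) g.len m' g.f) :
    MInv g i A2 A3 Ai A m' ∧ g.cb m' i = c := by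
  have hcw := h.c_where
  rw [hc] at hcw
  have ha' : ArenaOK A.1 A.2 m' g.f := by
    obtain ⟨p1, p2, p3, p4, p5, p6, p7, p8, p9, p10, p11, p12, p13, p14⟩ := hp
    apply h.sd.arena.frame (by simp only [voff]; omega)
    simp only [voff]
    apply hs.eqOn
    intro w hw
    have k := hok w hw
    unfold OkWin OkWin0 Young at k
    omega
  apply h.move hp hc hs (fun w hw => (hok w hw).okA) (Arena.Extends.refl _) ha' (h.shadow.untouched hun) _ hb
  exact h.sd.env.live.sub (fun B hB => runBlk_extra hB)

/-- **The push of a return address** (every `call` of a segment: the 8 bytes below the steady rsp; `ha`: `by u_omega` from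
`w_rsp`) keeps `MInv`. WHEN: at `pre_<addr>` of a call (the callee's precondition is stated for the memory after the push) and
before `MInv.step` over the callee's footprint. -/
theorem MInv.push {g : Ghost} {i : Nat} {A2 A3 Ai : Arena} {A : Arena × List Obj} {m : Mem}
    (h : MInv g i A2 A3 Ai A m) (hp : Pos g A) (a : Word) (x : Nat) (ha : a.toNat + 8 = g.R) :
    MInv g i A2 A3 Ai A (m.writeLE a 8 x) ∧ g.cb (m.writeLE a 8 x) i = g.cb m i := by
  have p2 := hp.ra_hi
  have p1 := hp.r_eq
  have hsx : Mem.SameExcept [⟨g.R - 8, g.R⟩] m (m.writeLE a 8 x) := by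
    apply Mem.SameExcept.writeLE
    · omega
    · refine ⟨_, List.mem_cons_self, ?_, ?_⟩
      · simp only []
        omega
      · simp only []
        omega
  have hun : ShadowUntouched m (m.writeLE a 8 x) := by
    have hw8 : a.toNat + 8 ≤ 2 ^ 64 := by omega
    have hd8 : 0xC00000 + 0x200000 ≤ a.toNat ∨ a.toNat + 8 ≤ 0xC00000 := by omega
    exact Mem.eqOn_writeLE m a 8 x 0xC00000 0x200000 hw8 hd8
  have hb1 : Bits (g.Blk A) g.len (m.writeLE a 8 x) g.f := by
    apply bits_kept hp h.sd.bits hsx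
    intro w hw
    rw [List.mem_singleton.mp hw]
    left
    simp only []
    omega
  apply h.step hp rfl hsx hun _ hb1
  intro w hw
  rw [List.mem_singleton.mp hw]
  apply OkWin0.ok
  left
  simp only []
  omega

/-- **A window of an allocator's footprint**: the callee's stack frame below the steady rsp, `setup_memory_required`
`[f + 8, f + 12)`, `setup_offset` / `temp_offset` `[f + 128, f + 136)`, shadow bytes of the arena's buffer (`shadow_win_of_fits`). -/
def AllocWin (g : Ghost) (A : Arena × List Obj) (x : Span) : Prop :=
  (g.R - 408 ≤ x.lo ∧ x.hi ≤ g.R) ∨ (g.f + 8 ≤ x.lo ∧ x.hi ≤ g.f + 12) ∨ (g.f + 128 ≤ x.lo ∧ x.hi ≤ g.f + 136) ∨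
  (0xC00000 + A.1.B / 8 ≤ x.lo ∧ x.hi ≤ 0xC00000 + (A.1.B + A.1.L + 7) / 8)

/-- An allocator's window is a window of `MInv.rearena` / `MInv.alloc` (whatever the struct address). -/
theorem AllocWin.ok {g : Ghost} {A : Arena × List Obj} {x : Span} (c : Nat) (k : AllocWin g A x) :
    OkWin0 g c x ∨ (g.f + 8 ≤ x.lo ∧ x.hi ≤ g.f + 12) ∨ (g.f + 128 ≤ x.lo ∧ x.hi ≤ g.f + 136) ∨
      (0xC00000 + A.1.B / 8 ≤ x.lo ∧ x.hi ≤ 0xC00000 + (A.1.B + A.1.L + 7) / 8) := by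
  unfold AllocWin at k
  rcases k with k | k | k | k
  · exact Or.inl (Or.inl k)
  · exact Or.inr (Or.inl k)
  · exact Or.inr (Or.inr (Or.inl k))
  · exact Or.inr (Or.inr (Or.inr k))

/-- **THE STEP OVER AN ALLOCATOR CALL, general**: the ghost arena goes from `A` to `A'` (`hext`: `A.1.extends_pushSetup n`,
`.extends_pushTemp n`, `.extends_withTemp T' rest`); `ha'`, `hsh'`: the callee's post (its `ShadowInv … (rsp + 8)` with
`rsp + 8 = g.R`); `hx`: `*f` and the fixed objects are live for the new object list (the list grew: `MInv.alloc` does it; an object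
was dropped by `setup_temp_free`: `Cur.free`). `Bits f` needs no hypothesis: no allocator writes a reader's field. -/
theorem MInv.rearena {g : Ghost} {i : Nat} {A2 A3 Ai : Arena} {A A' : Arena × List Obj} {c : Nat} {m m' : Mem} {ws : List Span}
    (h : MInv g i A2 A3 Ai A m) (hp : Pos g A) (hc : g.cb m i = c) (hs : Mem.SameExcept ws m m')
    (hok : ∀ w, w ∈ ws → AllocWin g A w)
    (hext : A.1.Extends A'.1) (ha' : ArenaOK A'.1 A'.2 m' g.f) (hsh' : ShadowInv A'.2 g.frames' g.R m')
    (hx : BlkLive (listBlk g.extra) (g.Live A')) : MInv g i A2 A3 Ai A' m' ∧ g.cb m' i = c := by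
  have hcw := h.c_where
  rw [hc] at hcw
  have hblk : ∀ B, g.Blk A B → g.Blk A' B := fun B hB => runBlk_mono hext (fun _ hm => hm) B hB
  have hb : Bits (g.Blk A') g.len m' g.f := by
    have hb0 : Bits (g.Blk A) g.len m' g.f := by
      apply bits_kept hp h.sd.bits hs
      intro w hw
      obtain ⟨p1, p2, p3, p4, p5, p6, p7, p8, p9, p10, p11, p12, p13, p14⟩ := hp
      have k := hok w hw
      unfold AllocWin at k
      omega
    exact hb0.reblk (hblk _ hb0.OB1) (hblk _ (runBlk_extra (List.mem_cons_of_mem _ (fixed_in g.len))))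
  apply h.move hp hc hs _ hext ha' hsh' hx hb
  intro w hw
  have k := (hok w hw).ok c
  unfold OkWinA OkWin
  rcases k with k | k | k | k
  · exact Or.inl (Or.inl k)
  · exact Or.inr (Or.inl (Or.inl k))
  · exact Or.inr (Or.inr (Or.inl k))
  · exact Or.inr (Or.inr (Or.inr k))

/-- **THE STEP OVER A SUCCESSFUL `setup_malloc(f, n)`** (C2, C5, C6, C8, C12, C14; `n` = `(rsi).toNat % 2 ^ 32` of the call state):
the ghost arena grows to `(A.1.pushSetup n, A.1.newSetupObj n :: A.2)`. `hfit`: the case of the callee's post; `ha'`, `hsh'`: its two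
conclusions (`rdi = f`, `rsp + 8 = R` rewritten); `hs`: its footprint. The new block is `Since A.1 (A.1.pushSetup n)`
(`ArenaOK.since_pushSetup`, with the ArenaOK of BEFORE the call: `h.sd.arena`), hence `Since Ai …` by `Since.older`. -/
theorem MInv.alloc {g : Ghost} {i : Nat} {A2 A3 Ai : Arena} {A : Arena × List Obj} {c : Nat} {m m' : Mem} {ws : List Span}
    (h : MInv g i A2 A3 Ai A m) (hp : Pos g A) (hc : g.cb m i = c) (n : Nat) (hs : Mem.SameExcept ws m m')
    (hok : ∀ w, w ∈ ws → AllocWin g A w)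
    (ha' : ArenaOK (A.1.pushSetup n) (A.1.newSetupObj n :: A.2) m' g.f)
    (hsh' : ShadowInv (A.1.newSetupObj n :: A.2) g.frames' g.R m') :
    MInv g i A2 A3 Ai (A.1.pushSetup n, A.1.newSetupObj n :: A.2) m' ∧ g.cb m' i = c := by
  apply h.rearena hp hc hs hok (A.1.extends_pushSetup n) ha' hsh'
  have hl : BlkLive (listBlk g.extra) (g.Live A) := h.sd.env.live.sub (fun B hB => runBlk_extra hB)
  refine hl.mono (fun x hx => ?_)
  obtain ⟨o, ho, hb⟩ := hx
  refine ⟨o, ?_, hb⟩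
  rcases List.mem_append.mp ho with hst | hoth
  · exact List.mem_append_left _ hst
  · exact List.mem_append_right _ (List.mem_cons_of_mem _ hoth)

/-- **The shadow window of `setup_malloc`'s footprint is a window of the arena's shadow** (the fourth alternative of `AllocWin`), when the request fits. -/
theorem shadow_win_of_fits {A : Arena} {others : List Obj} {m : Mem} {f n : Nat} (ha : ArenaOK A others m f) (hfit : A.Fits n) :
    0xC00000 + A.B / 8 ≤ (shadowSpan (A.B + A.S + 32) (A.B + A.S + 32 + n)).lo ∧
      (shadowSpan (A.B + A.S + 32) (A.B + A.S + 32 + n)).hi ≤ 0xC00000 + (A.B + A.L + 7) / 8 := by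
  have h2 := ha.AR2
  have hl := le_r8 n
  unfold Arena.Fits at hfit
  simp only [shadowSpan]
  omega

/-! ### 6. K1 – K5 of the book under construction, field by field (no `Codebook.SameFields`) -/

/-- **The fields of the struct at `c` that K1 – K4c read are the same in two memories** — everything but `value_bits`,
`lookup_type`, `sequence_p` (`[c + 24, c + 27)`) and `fast_huffman` (`[c + 48, c + 2096)`): what survives
`compute_accelerated_huffman` and the stores of segment C9 / C11. (`Codebook.SameFields` is FALSE there: fast_huffman is one of
its fields.) -/
structure BookFields (m m' : Mem) (c : Nat) : Prop where
  dimensions : Codebook.dimensions m' c = Codebook.dimensions m c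
  entries : Codebook.entries m' c = Codebook.entries m c
  codeword_lengths : Codebook.codeword_lengths m' c = Codebook.codeword_lengths m c
  sparse : Codebook.sparse m' c = Codebook.sparse m c
  lookup_values : Codebook.lookup_values m' c = Codebook.lookup_values m c
  multiplicands : Codebook.multiplicands m' c = Codebook.multiplicands m c
  codewords : Codebook.codewords m' c = Codebook.codewords m c
  sorted_codewords : Codebook.sorted_codewords m' c = Codebook.sorted_codewords m c
  sorted_values : Codebook.sorted_values m' c = Codebook.sorted_values m c
  sorted_entries : Codebook.sorted_entries m' c = Codebook.sorted_entries m c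

/-- The fields from the three kept parts of the struct (`hs.eqOn _ _ (by … u_omega)` from the footprint). -/
theorem BookFields.of_eqOn {m m' : Mem} {c : Nat} (hc : c + 2120 ≤ 2 ^ 64) (b1 : Mem.EqOn c (c + 24) m m')
    (b2 : Mem.EqOn (c + 27) (c + 48) m m') (b3 : Mem.EqOn (c + 2096) (c + 2120) m m') : BookFields m m' c := by
  constructor
  · simp only [vacc, voff]
    exact b1.i32 _ (by omega) (by omega) (by omega)
  · simp only [vacc, voff]
    exact b1.i32 _ (by omega) (by omega) (by omega)
  · simp only [vacc, voff]
    exact b1.u64 _ (by omega) (by omega) (by omega)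
  · simp only [vacc, voff]
    exact b2.u8 _ (by omega) (by omega) (by omega)
  · simp only [vacc, voff]
    exact b2.u32 _ (by omega) (by omega) (by omega)
  · simp only [vacc, voff]
    exact b2.u64 _ (by omega) (by omega) (by omega)
  · simp only [vacc, voff]
    exact b2.u64 _ (by omega) (by omega) (by omega)
  · simp only [vacc, voff]
    exact b3.u64 _ (by omega) (by omega) (by omega)
  · simp only [vacc, voff]
    exact b3.u64 _ (by omega) (by omega) (by omega)
  · simp only [vacc, voff]
    exact b3.i32 _ (by omega) (by omega) (by omega)

/-- **The fields over a step with quiet windows whose windows inside the struct lie in `[c + 24, c + 27)` or `[c + 48, c + 2096)`**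
(`hstruct`; a callee that does not touch the struct: `fun w hw h1 h2 => by … u_omega`, contradiction). For an ABSTRACT window list
put `w.lo < w.hi` into your window predicate: an empty window placed at the struct's edge has no contradiction (`C9cWin` of
farm/hints/start_decoder.C9c.head-start.lean does). -/
theorem BookFields.of_step0 {g : Ghost} {i : Nat} {A2 A3 Ai : Arena} {A : Arena × List Obj} {c : Nat} {m m' : Mem}
    {ws : List Span} (h : MInv g i A2 A3 Ai A m) (hp : Pos g A) (hc : g.cb m i = c) (hs : Mem.SameExcept ws m m')
    (hok : ∀ w, w ∈ ws → OkWin0 g c w)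
    (hstruct : ∀ w, w ∈ ws → c ≤ w.lo → w.hi ≤ c + 2120 → (c + 24 ≤ w.lo ∧ w.hi ≤ c + 27) ∨ (c + 48 ≤ w.lo ∧ w.hi ≤ c + 2096)) :
    BookFields m m' c := by
  have hcw := h.c_where
  rw [hc] at hcw
  obtain ⟨p1, p2, p3, p4, p5, p6, p7, p8, p9, p10, p11, p12, p13, p14⟩ := hp
  apply BookFields.of_eqOn (by omega)
  all_goals
    apply hs.eqOn
    intro w hw
    have k := hok w hw
    have k2 := hstruct w hw
    unfold OkWin0 at k
    omega

/-- Frame of K1 over the fields it reads. -/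
theorem BookFields.k1 {m m' : Mem} {c : Nat} (e : BookFields m m' c) (h : Codebook.K1 m c) : Codebook.K1 m' c := by
  refine ⟨?_, ?_, ?_, ?_⟩
  · rw [e.dimensions]
    exact h.dim_pos
  · rw [e.dimensions]
    exact h.dim_le
  · rw [e.entries]
    exact h.ent_nonneg
  · rw [e.entries]
    exact h.ent_lt

/-- Frame of K2 over the fields it reads. -/
theorem BookFields.k2 {m m' : Mem} {c : Nat} (e : BookFields m m' c) (h : Codebook.K2 m c) : Codebook.K2 m' c := by
  refine ⟨?_, ?_, ?_, ?_, ?_⟩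
  · rw [e.sparse]
    exact h.sparse_01
  · rw [e.sorted_entries]
    exact h.se_nonneg
  · rw [e.sorted_entries, e.entries]
    exact h.se_le
  · rw [e.sparse, e.sorted_entries]
    exact h.sparse_pos
  · rw [e.sparse, e.sorted_entries, e.entries]
    exact h.sparse_quarter

/-- Frame of K3 over the fields it reads (the contents of the tables are free). -/
theorem BookFields.k3 {Blk : Block → Prop} {m m' : Mem} {c : Nat} (e : BookFields m m' c) (h : Codebook.K3 Blk m c) :
    Codebook.K3 Blk m' c := by
  refine ⟨?_, ?_⟩
  · intro hs
    rw [e.sparse] at hs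
    have k := h.dense hs
    refine ⟨?_, ?_⟩
    · rw [e.codeword_lengths, e.entries]
      exact k.lengths
    · rw [e.codewords, e.entries]
      exact k.codewords
  · intro hs
    rw [e.sparse] at hs
    have k := h.sparse hs
    refine ⟨?_, ?_⟩
    · rw [e.codeword_lengths, e.sorted_entries]
      exact k.lengths
    · rw [e.codewords]
      exact k.codewords_null

/-- Frame of K4 over the fields it reads and the `sorted_values` block (the sentinel word; `hv`: `young_kept0`, `blk_kept0`). -/
theorem BookFields.k4 {Blk : Block → Prop} {m m' : Mem} {c : Nat} (e : BookFields m m' c) (h : Codebook.K4 Blk m c)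
    (hv : 1 ≤ Codebook.sorted_entries m c → (Codebook.svBlock m c).Kept m m') : Codebook.K4 Blk m' c := by
  refine ⟨?_, ?_, ?_, ?_⟩
  · rw [e.sorted_entries, e.sorted_codewords]
    exact h.sc
  · rw [e.sorted_entries, e.sorted_values]
    exact h.sv
  · rw [e.sorted_entries, e.sorted_values]
    intro hse
    rw [(hv hse).i32 _ (Nat.le_refl _) (by simp only []; omega)]
    exact h.sentinel hse
  · rw [e.sorted_entries, e.sorted_codewords, e.sorted_values]
    exact h.null

/-- Frame of K4c over the fields it reads and the `sorted_values` block. -/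
theorem BookFields.k4c {m m' : Mem} {c : Nat} (e : BookFields m m' c) (h : Codebook.K4c m c)
    (hv : 1 ≤ Codebook.sorted_entries m c → (Codebook.svBlock m c).Kept m m') : Codebook.K4c m' c := by
  intro x hx
  rw [e.sorted_entries] at hx
  have hse : 1 ≤ Codebook.sorted_entries m c := by omega
  have e1 : Codebook.sorted_values_at m' c x = Codebook.sorted_values_at m c x := by
    simp only [Codebook.sorted_values_at, e.sorted_values]
  have e2 : m'.i32 (Codebook.sorted_values_at m c x) = m.i32 (Codebook.sorted_values_at m c x) := by
    simp only [Codebook.sorted_values_at]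
    apply (hv hse).i32
    · simp only []
      omega
    · simp only []
      omega
  rw [e1, e2, e.entries]
  exact h x hx

/-- **K1 – K5 OVER A CHANGE OF THE FIELD `multiplicands`**: K1 – K5 read every field of the struct at `c` EXCEPT `multiplicands`
(`[c + 32, c + 40)`), so they survive when the two parts of the struct around that field are kept, and (when the book has sorted
tables) the `sorted_values` block. -/
theorem K15.of_kept {Blk : Block → Prop} {mem mem' : Mem} {c : Nat} (h : K15 Blk mem c)
    (hlo : (Block.mk c 32).Kept mem mem') (hhi : (Block.mk (c + 40) 2080).Kept mem mem')
    (hv : 1 ≤ Codebook.sorted_entries mem c → (Codebook.svBlock mem c).Kept mem mem') : K15 Blk mem' c := by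
  have e_dim : Codebook.dimensions mem' c = Codebook.dimensions mem c := by
    simp only [vacc, voff]
    exact hlo.i32 _ (by simp only []; omega) (by simp only []; omega)
  have e_ent : Codebook.entries mem' c = Codebook.entries mem c := by
    simp only [vacc, voff]
    exact hlo.i32 _ (by simp only []; omega) (by simp only []; omega)
  have e_cl : Codebook.codeword_lengths mem' c = Codebook.codeword_lengths mem c := by
    simp only [vacc, voff]
    exact hlo.u64 _ (by simp only []; omega) (by simp only []; omega)
  have e_sp : Codebook.sparse mem' c = Codebook.sparse mem c := by
    simp only [vacc, voff]
    exact hlo.u8 _ (by simp only []; omega) (by simp only []; omega)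
  have e_lv : Codebook.lookup_values mem' c = Codebook.lookup_values mem c := by
    simp only [vacc, voff]
    exact hlo.u32 _ (by simp only []; omega) (by simp only []; omega)
  have e_cw : Codebook.codewords mem' c = Codebook.codewords mem c := by
    simp only [vacc, voff]
    exact hhi.u64 _ (by simp only []; omega) (by simp only []; omega)
  have e_fh : ∀ k, k < 1024 → Codebook.fast_huffman mem' c k = Codebook.fast_huffman mem c k := by
    intro k hk
    simp only [vacc, voff]
    exact hhi.i16 _ (by simp only []; omega) (by simp only []; omega)
  have e_sc : Codebook.sorted_codewords mem' c = Codebook.sorted_codewords mem c := by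
    simp only [vacc, voff]
    exact hhi.u64 _ (by simp only []; omega) (by simp only []; omega)
  have e_sv : Codebook.sorted_values mem' c = Codebook.sorted_values mem c := by
    simp only [vacc, voff]
    exact hhi.u64 _ (by simp only []; omega) (by simp only []; omega)
  have e_se : Codebook.sorted_entries mem' c = Codebook.sorted_entries mem c := by
    simp only [vacc, voff]
    exact hhi.i32 _ (by simp only []; omega) (by simp only []; omega)
  have e_N : Codebook.N mem' c = Codebook.N mem c := by
    unfold Codebook.N
    rw [e_sp, e_ent, e_se]
  -- K1 – K4c through the field equations (the value of `multiplicands` is not used by them)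
  have k1 : Codebook.K1 mem' c := by
    refine ⟨?_, ?_, ?_, ?_⟩
    · rw [e_dim]
      exact h.k1.dim_pos
    · rw [e_dim]
      exact h.k1.dim_le
    · rw [e_ent]
      exact h.k1.ent_nonneg
    · rw [e_ent]
      exact h.k1.ent_lt
  have k2 : Codebook.K2 mem' c := by
    refine ⟨?_, ?_, ?_, ?_, ?_⟩
    · rw [e_sp]
      exact h.k2.sparse_01
    · rw [e_se]
      exact h.k2.se_nonneg
    · rw [e_se, e_ent]
      exact h.k2.se_le
    · rw [e_sp, e_se]
      exact h.k2.sparse_pos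
    · rw [e_sp, e_se, e_ent]
      exact h.k2.sparse_quarter
  have k3 : Codebook.K3 Blk mem' c := by
    refine ⟨?_, ?_⟩
    · intro hs
      rw [e_sp] at hs
      have k := h.k3.dense hs
      refine ⟨?_, ?_⟩
      · rw [e_cl, e_ent]
        exact k.lengths
      · rw [e_cw, e_ent]
        exact k.codewords
    · intro hs
      rw [e_sp] at hs
      have k := h.k3.sparse hs
      refine ⟨?_, ?_⟩
      · rw [e_cl, e_se]
        exact k.lengths
      · rw [e_cw]
        exact k.codewords_null
  have k4 : Codebook.K4 Blk mem' c := by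
    refine ⟨?_, ?_, ?_, ?_⟩
    · rw [e_se, e_sc]
      exact h.k4.sc
    · rw [e_se, e_sv]
      exact h.k4.sv
    · rw [e_se, e_sv]
      intro hse
      rw [(hv hse).i32 _ (Nat.le_refl _) (by simp only []; omega)]
      exact h.k4.sentinel hse
    · rw [e_se, e_sc, e_sv]
      exact h.k4.null
  have k4c : Codebook.K4c mem' c := by
    intro x hx
    rw [e_se] at hx
    have hse : 1 ≤ Codebook.sorted_entries mem c := by omega
    have e_at : Codebook.sorted_values_at mem' c x = Codebook.sorted_values_at mem c x := by
      simp only [Codebook.sorted_values_at, e_sv]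
    have e_w : mem'.i32 (Codebook.sorted_values_at mem c x) = mem.i32 (Codebook.sorted_values_at mem c x) := by
      simp only [Codebook.sorted_values_at]
      apply (hv hse).i32
      · simp only []
        omega
      · simp only []
        omega
    rw [e_at, e_w, e_ent]
    exact h.k4c x hx
  refine ⟨k1, k2, k3, k4, k4c, ?_⟩
  intro k hk
  rw [e_fh k hk, e_N]
  exact h.k5 k hk

/-- **`K15.store_book`: K1 – K5 over the store `c->multiplicands = p`** — `mov [r14+20H], rbp` at 0x114e44 / 0x114ec0 (C12),
0x1150d6 (C14). THE LEMMA THAT THE HEADER OF Vorbis/Spec/StartDecoderA.lean (l. 443) CITES. `K15.frame` cannot be used there: its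
premise `Codebook.SameFields` contains `multiplicands mem' c = multiplicands mem c`. `hv`: the `sorted_values` block (allocated
since `Ai`, off the struct) is kept by the store: `Cur.young_kept`, or `(young_off_book …)` + `Block.Kept.of_writeLE`. -/
theorem K15.store_book {Blk : Block → Prop} {mem : Mem} {c : Nat} (h : K15 Blk mem c) (hc : c + 2120 ≤ 2 ^ 64) (x : Nat)
    (hv : 1 ≤ Codebook.sorted_entries mem c →
      (Codebook.svBlock mem c).Kept mem (mem.writeLE (addr (c + 32)) 8 x)) :
    K15 Blk (mem.writeLE (addr (c + 32)) 8 x) c := by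
  have hin : (Block.mk (c + 32) 8).contains (c + 32) 8 := by
    simp only [vblock]
    omega
  apply K15.of_kept h ?_ ?_ hv
  · apply Block.Kept.of_writeLE mem (c + 32) 8 x ?_ hin
    · simp only []
      omega
    · simp only []
      omega
    · simp only [vblock]
      omega
  · apply Block.Kept.of_writeLE mem (c + 32) 8 x ?_ hin
    · simp only []
      omega
    · simp only []
      omega
    · simp only [vblock]
      omega

/-- **K1 – K5 over a step that keeps the struct but for `[c + 24, c + 27)`** (value_bits, lookup_type, sequence_p: the stores of
C9 / C11) — `e`: `BookFields.of_step0`; `efh`: fast_huffman `[c + 48, c + 2096)` kept; `hv`: the `sorted_values` block. -/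
theorem K15.of_fields {Blk : Block → Prop} {m m' : Mem} {c : Nat} (h : K15 Blk m c) (e : BookFields m m' c)
    (hc : c + 2120 ≤ 2 ^ 64) (efh : Mem.EqOn (c + 48) (c + 2096) m m')
    (hv : 1 ≤ Codebook.sorted_entries m c → (Codebook.svBlock m c).Kept m m') : K15 Blk m' c := by
  refine ⟨e.k1 h.k1, e.k2 h.k2, e.k3 h.k3, e.k4 h.k4 hv, e.k4c h.k4c hv, ?_⟩
  intro k hk
  have e_fh : Codebook.fast_huffman m' c k = Codebook.fast_huffman m c k := by
    simp only [vacc, voff]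
    exact efh.i16 _ (by omega) (by omega) (by omega)
  have e_N : Codebook.N m' c = Codebook.N m c := by
    unfold Codebook.N
    rw [e.sparse, e.entries, e.sorted_entries]
  rw [e_fh, e_N]
  exact h.k5 k hk

/-! ### 7. The same, stated for `Frame` and `Cur` at two states (the form the farm reports asked for) -/

/-- **`Frame` over a step** (`w_same` of a callee after `v_after_call`, or `u_same` of the walker's stores): all 19 fields at the
state `w` with the new program counter. `hc`: the `Cur` of the SAME state `v` (the record with the ages says which arena blocks a
window may hit). The windows: `OkWin` (stack below the steady rsp / free locals of the own frame / the struct `cb(i)` / the reader's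
and `error`'s fields of `*f` / a young block). -/
theorem Frame.step {u₀ : State} {g : Ghost} {pc pc' : Word} {i : Nat} {A2 A3 Ai : Arena} {A : Arena × List Obj} {v w : State}
    {ws : List Span} (h : Frame u₀ g pc A v) (hc : Cur g i A2 A3 Ai A v) (hs : Mem.SameExcept ws v.mem w.mem)
    (hun : ShadowUntouched v.mem w.mem) (hok : ∀ x, x ∈ ws → OkWin g Ai A (g.cb v.mem i) x)
    (hb : Bits (g.Blk A) g.len w.mem g.f) (hrip : w.rip = pc') (hrsp : w.reg .rsp = v.reg .rsp) (hcode : CodeOK u₀ w.mem)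
    (hinv : abiInv w) : Frame u₀ g pc' A w := by
  have hst := (MInv.of h hc).step (Pos.of h hc) rfl hs hun hok hb
  exact hst.1.frame h hrip (hrsp.trans h.rsp) hcode hinv h.offText h.ext

/-- **CUR(i) over a step**, and `cb(i)` is the same address (rewrite the point's own clauses with it). `hr14`: the callee keeps
r14 (`w_kept`), or the walker did not write it. -/
theorem Cur.step {u₀ : State} {g : Ghost} {pc : Word} {i : Nat} {A2 A3 Ai : Arena} {A : Arena × List Obj} {v w : State}
    {ws : List Span} (h : Frame u₀ g pc A v) (hc : Cur g i A2 A3 Ai A v) (hs : Mem.SameExcept ws v.mem w.mem)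
    (hun : ShadowUntouched v.mem w.mem) (hok : ∀ x, x ∈ ws → OkWin g Ai A (g.cb v.mem i) x)
    (hb : Bits (g.Blk A) g.len w.mem g.f) (hr14 : w.reg .r14 = v.reg .r14) :
    Cur g i A2 A3 Ai A w ∧ g.cb w.mem i = g.cb v.mem i := by
  have hst := (MInv.of h hc).step (Pos.of h hc) rfl hs hun hok hb
  refine ⟨hst.1.cur hc.hand ?_, hst.2⟩
  rw [hst.2, hr14]
  exact hc.r14

/-- **A footprint that does not meet the arena's buffer keeps every setup block** (an allocator's, a reader's, `error`'s, a push):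
the contents of every table of book `i` — `lengths`, `values`, `mults` are READ after such calls. -/
theorem allKept_off_arena {A : Arena × List Obj} {m m' : Mem} {f : Nat} {ws : List Span} (ha : ArenaOK A.1 A.2 m f)
    (hs : Mem.SameExcept ws m m') (hw : ∀ x, x ∈ ws → x.hi ≤ A.1.B ∨ A.1.B + A.1.L ≤ x.lo) : AllKept A.1.Blk m m' := by
  intro B hB
  have hin := arena_inside ha hB
  apply Block.Kept.of_sameExcept hs _ (ha.blkOK.no_wrap hB)
  intro x hx
  have := hw x hx
  omega

/-- **`Frame` and CUR(i) over a successful `setup_malloc(f, n)`** (C12's two calls 0x114e33 / 0x114eaf → `InC13`; C2, C5, C6, C8,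
C14 likewise): the ghost arena of the new point is EXACTLY `(A.1.pushSetup n, A.1.newSetupObj n :: A.2)`; the new block
`⟨A.1.B + (A.1.S + 32), n⟩` is `Since A.1 (A.1.pushSetup n)` (`hc.sd.arena.since_pushSetup n`), every old block is kept. `ha'`,
`hsh'`: the callee's post in the case `A.1.Fits n`; `hs`: `w_same` (callee's frame, `[f + 8, f + 12)`, `[f + 128, f + 132)`, the
shadow of the new block: `shadow_win_of_fits`). -/
theorem Cur.alloc {u₀ : State} {g : Ghost} {pc pc' : Word} {i : Nat} {A2 A3 Ai : Arena} {A : Arena × List Obj} {v w : State}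
    {ws : List Span} (n : Nat) (h : Frame u₀ g pc A v) (hc : Cur g i A2 A3 Ai A v) (hs : Mem.SameExcept ws v.mem w.mem)
    (hok : ∀ x, x ∈ ws → AllocWin g A x)
    (ha' : ArenaOK (A.1.pushSetup n) (A.1.newSetupObj n :: A.2) w.mem g.f)
    (hsh' : ShadowInv (A.1.newSetupObj n :: A.2) g.frames' g.R w.mem)
    (hrip : w.rip = pc') (hrsp : w.reg .rsp = v.reg .rsp) (hcode : CodeOK u₀ w.mem) (hinv : abiInv w)
    (hr14 : w.reg .r14 = v.reg .r14) :
    Frame u₀ g pc' (A.1.pushSetup n, A.1.newSetupObj n :: A.2) w ∧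
      Cur g i A2 A3 Ai (A.1.pushSetup n, A.1.newSetupObj n :: A.2) w ∧ g.cb w.mem i = g.cb v.mem i ∧
      AllKept A.1.Blk v.mem w.mem := by
  have hpos := Pos.of h hc
  have hm := MInv.of h hc
  have hst := hm.alloc hpos rfl n hs hok ha' hsh'
  have hext := A.1.extends_pushSetup n
  have hand' : g.Hand (A.1.pushSetup n, A.1.newSetupObj n :: A.2) :=
    HandOK.mono hc.hand hext (fun o ho => List.mem_cons_of_mem _ ho)
  have hoff' : ∀ o, o ∈ A.1.newSetupObj n :: A.2 → L.textHi ≤ o.base := by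
    intro o ho
    rcases List.mem_cons.mp ho with rfl | hold
    · have ht := hc.hand.arenaText
      show L.textHi ≤ A.1.B + (A.1.S + 32)
      omega
    · exact h.offText o hold
  refine ⟨hst.1.frame h hrip (hrsp.trans h.rsp) hcode hinv hoff' (h.ext.trans hext), ?_, hst.2, ?_⟩
  · apply hst.1.cur hand'
    rw [hst.2, hr14]
    exact hc.r14
  · apply allKept_off_arena hc.sd.arena hs
    intro x hx
    obtain ⟨p1, p2, p3, p4, p5, p6, p7, p8, p9, p10, p11, p12, p13, p14⟩ := hpos
    have k := hok x hx
    unfold AllocWin at k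
    omega

/-- **`Frame` and CUR(i) over ANY allocator call that changes the ghost arena to `A'`** — `setup_temp_free` (C5, C7, C8, C11, C15,
the error paths of C12 / C13: `A' = (A.1.withTemp (A.1.T + r8 n + 32) rest, dropObjs [A.1.tempObj (A.1.T, m)] A.2)`, `hext :=
A.1.extends_withTemp _ _`), `setup_temp_malloc` (C2, C5, C11: `A' = (A.1.pushTemp n, A.1.newTempObj n :: A.2)`, `hext :=
A.1.extends_pushTemp n`). `ha'`, `hsh'`: the callee's post. `hand'`: the hand-over carrier for the new object list (the list
grew: `HandOK.mono`; an object was dropped: `*f`, the input, the output, the globals are other objects than the released temp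
block — `Hand`'s fields one by one with `mem_dropObjs`); `hx`: `*f` and the fixed objects are live for the new list (the same
argument; the list grew: `BlkLive.mono`). Every setup block is kept. -/
theorem Cur.free {u₀ : State} {g : Ghost} {pc pc' : Word} {i : Nat} {A2 A3 Ai : Arena} {A A' : Arena × List Obj} {v w : State}
    {ws : List Span} (h : Frame u₀ g pc A v) (hc : Cur g i A2 A3 Ai A v) (hs : Mem.SameExcept ws v.mem w.mem)
    (hok : ∀ x, x ∈ ws → AllocWin g A x) (hext : A.1.Extends A'.1) (ha' : ArenaOK A'.1 A'.2 w.mem g.f)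
    (hsh' : ShadowInv A'.2 g.frames' g.R w.mem) (hand' : g.Hand A') (hx : BlkLive (listBlk g.extra) (g.Live A'))
    (hoff' : ∀ o, o ∈ A'.2 → L.textHi ≤ o.base)
    (hrip : w.rip = pc') (hrsp : w.reg .rsp = v.reg .rsp) (hcode : CodeOK u₀ w.mem) (hinv : abiInv w)
    (hr14 : w.reg .r14 = v.reg .r14) :
    Frame u₀ g pc' A' w ∧ Cur g i A2 A3 Ai A' w ∧ g.cb w.mem i = g.cb v.mem i ∧ AllKept A.1.Blk v.mem w.mem := by
  have hpos := Pos.of h hc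
  have hm := MInv.of h hc
  have hst := hm.rearena hpos rfl hs hok hext ha' hsh' hx
  refine ⟨hst.1.frame h hrip (hrsp.trans h.rsp) hcode hinv hoff' (h.ext.trans hext), ?_, hst.2, ?_⟩
  · apply hst.1.cur hand'
    rw [hst.2, hr14]
    exact hc.r14
  · apply allKept_off_arena hc.sd.arena hs
    intro x hx
    obtain ⟨p1, p2, p3, p4, p5, p6, p7, p8, p9, p10, p11, p12, p13, p14⟩ := hpos
    have k := hok x hx
    unfold AllocWin at k
    omega

/-! ### 8. A whole `call setup_malloc`, from the cut point's memory to the returned state -/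

/-- The push of the return address followed by `setup_malloc`'s footprint, as ONE footprint over the cut point's memory, every
window an `AllocWin` (the shadow window under `hsub`: `shadow_win_of_fits`, or trivially when nothing was allocated). -/
theorem alloc_call_same {g : Ghost} {A : Arena × List Obj} {m ms mr : Mem} {a : Word} {x sp f' n : Nat} (hp : Pos g A)
    (hmem : ms = m.writeLE a 8 x) (ha : a.toNat + 8 = g.R) (hsp : sp + 8 = g.R) (hf : f' = g.f)
    (hs : Mem.SameExcept [⟨sp - 80, sp⟩, ⟨f' + 8, f' + 12⟩, ⟨f' + 128, f' + 132⟩,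
      shadowSpan (A.1.B + A.1.S + 32) (A.1.B + A.1.S + 32 + n)] ms mr)
    (hsub : 0xC00000 + A.1.B / 8 ≤ (shadowSpan (A.1.B + A.1.S + 32) (A.1.B + A.1.S + 32 + n)).lo ∧
      (shadowSpan (A.1.B + A.1.S + 32) (A.1.B + A.1.S + 32 + n)).hi ≤ 0xC00000 + (A.1.B + A.1.L + 7) / 8) :
    ∃ ws, Mem.SameExcept ws m mr ∧ ∀ w, w ∈ ws → AllocWin g A w := by
  have p1 := hp.r_eq
  have p2 := hp.ra_hi
  have p3 := hp.ra_lo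
  refine ⟨[⟨g.R - 88, g.R⟩, ⟨g.f + 8, g.f + 12⟩, ⟨g.f + 128, g.f + 132⟩,
    shadowSpan (A.1.B + A.1.S + 32) (A.1.B + A.1.S + 32 + n)], ?_, ?_⟩
  · refine Mem.SameExcept.trans (ν := ms) ?_ ?_
    · rw [hmem]
      apply Mem.SameExcept.writeLE
      · omega
      · refine ⟨_, List.mem_cons_self, ?_, ?_⟩
        · simp only []
          omega
        · simp only []
          omega
    · apply hs.mono
      intro w hw b h1 h2
      simp only [List.mem_cons, List.mem_nil_iff, or_false] at hw
      rcases hw with rfl | rfl | rfl | rfl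
      · simp only [] at h1 h2
        exact ⟨_, List.mem_cons_self, by simp only []; omega, by simp only []; omega⟩
      · simp only [] at h1 h2
        exact ⟨_, List.mem_cons_of_mem _ List.mem_cons_self, by simp only []; omega, by simp only []; omega⟩
      · simp only [] at h1 h2
        exact ⟨_, List.mem_cons_of_mem _ (List.mem_cons_of_mem _ List.mem_cons_self), by simp only []; omega,
          by simp only []; omega⟩
      · exact ⟨_, List.mem_cons_of_mem _ (List.mem_cons_of_mem _ (List.mem_cons_of_mem _ List.mem_cons_self)), h1, h2⟩
  · intro w hw
    simp only [List.mem_cons, List.mem_nil_iff, or_false] at hw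
    unfold AllocWin
    rcases hw with rfl | rfl | rfl | rfl
    · left
      simp only []
      omega
    · right
      left
      simp only []
      omega
    · right
      right
      left
      simp only []
      omega
    · right
      right
      right
      exact hsub

/-- **A WHOLE `call setup_malloc` THAT SUCCEEDS, in the walker's terms**: `v` = the cut point (its `Frame`, `Cur`), `s` = the state
at the callee's entry (`hmem` = `w_mem_<addr>`: the pushed return address; `ha`, `hsp`, `hrdi`: `by rw [w_rsp_<addr>]; u_omega`,
`toNat_addr`), `sr` = the returned state. `hs` = `w_same` after `simp only [X86.User.Spec.footprint, vspec] at w_same`; `hpost` =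
`w_post`; `hfit`: the case `A.1.Fits n` (`n` = the request, `(s.reg .rsi).toNat % 2 ^ 32`). Gives `Frame` and CUR(i) at `sr` for
the grown ghost `(A.1.pushSetup n, A.1.newSetupObj n :: A.2)` — what `InC13` (from C12), `InC3` / `InC4` (from C2) … are stated
over —, rax = the new block's address, `cb(i)` unmoved, every old setup block kept. -/
theorem Cur.alloc_call {u₀ : State} {g : Ghost} {pc pc' : Word} {i : Nat} {A2 A3 Ai : Arena} {A : Arena × List Obj}
    {v s sr : State} {a : Word} {x : Nat} (h : Frame u₀ g pc A v) (hc : Cur g i A2 A3 Ai A v)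
    (hmem : s.mem = v.mem.writeLE a 8 x) (ha : a.toNat + 8 = g.R) (hsp : (s.reg .rsp).toNat + 8 = g.R)
    (hrdi : (s.reg .rdi).toNat = g.f)
    (hs : Mem.SameExcept [⟨(s.reg .rsp).toNat - 80, (s.reg .rsp).toNat⟩,
      ⟨(s.reg .rdi).toNat + 8, (s.reg .rdi).toNat + 12⟩, ⟨(s.reg .rdi).toNat + 128, (s.reg .rdi).toNat + 132⟩,
      shadowSpan (A.1.B + A.1.S + 32) (A.1.B + A.1.S + 32 + (s.reg .rsi).toNat % 2 ^ 32)] s.mem sr.mem)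
    (hpost : (setup_malloc.spec A.2 g.frames' A.1).post s sr) (hfit : A.1.Fits ((s.reg .rsi).toNat % 2 ^ 32))
    (hrip : sr.rip = pc') (hrsp : sr.reg .rsp = v.reg .rsp) (hcode : CodeOK u₀ sr.mem) (hinv : abiInv sr)
    (hr14 : sr.reg .r14 = v.reg .r14) :
    Frame u₀ g pc' (A.1.pushSetup ((s.reg .rsi).toNat % 2 ^ 32), A.1.newSetupObj ((s.reg .rsi).toNat % 2 ^ 32) :: A.2) sr ∧
      Cur g i A2 A3 Ai (A.1.pushSetup ((s.reg .rsi).toNat % 2 ^ 32), A.1.newSetupObj ((s.reg .rsi).toNat % 2 ^ 32) :: A.2) sr ∧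
      g.cb sr.mem i = g.cb v.mem i ∧ AllKept A.1.Blk v.mem sr.mem ∧ (sr.reg .rax).toNat = A.1.B + A.1.S + 32 := by
  obtain ⟨hrax, ha', hsh'⟩ := hpost.1 hfit
  rw [hrdi] at ha'
  rw [hsp] at hsh'
  have hpos := Pos.of h hc
  obtain ⟨ws, hall, hok⟩ := alloc_call_same hpos hmem ha hsp hrdi hs (shadow_win_of_fits hc.sd.arena hfit)
  obtain ⟨r1, r2, r3, r4⟩ := Cur.alloc _ h hc hall hok ha' hsh' hrip hrsp hcode hinv hr14
  exact ⟨r1, r2, r3, r4, hrax⟩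

/-- **A WHOLE `call setup_malloc` THAT FAILS** (`¬ A.1.Fits n`: rax = 0, the arena and the shadow as they were; the callee may
have written `setup_memory_required`): `Frame` and CUR(i) at the returned state for the SAME ghost. Arguments as `Cur.alloc_call`.
`hn`: THE REQUEST IS BELOW 4 MB. FINDING (contract of `setup_malloc`, Vorbis/Spec/Alloc.lean): its `writes` lists the shadow window
`shadowSpan p (p + n)` on the failure path too; for a request that does not fit, `n` may be so large that this window reaches
beyond the shadow region `[C00000H, E00000H)`, where the post (`ShadowUntouched`) says nothing — then `Frame.same` (nothing outside
the function's footprint was written) cannot be re-established. With `hn` the window stays inside the shadow region. -/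
theorem Cur.alloc_fail {u₀ : State} {g : Ghost} {pc pc' : Word} {i : Nat} {A2 A3 Ai : Arena} {A : Arena × List Obj}
    {v s sr : State} {a : Word} {x : Nat} (h : Frame u₀ g pc A v) (hc : Cur g i A2 A3 Ai A v)
    (hmem : s.mem = v.mem.writeLE a 8 x) (ha : a.toNat + 8 = g.R) (hsp : (s.reg .rsp).toNat + 8 = g.R)
    (hrdi : (s.reg .rdi).toNat = g.f)
    (hs : Mem.SameExcept [⟨(s.reg .rsp).toNat - 80, (s.reg .rsp).toNat⟩,
      ⟨(s.reg .rdi).toNat + 8, (s.reg .rdi).toNat + 12⟩, ⟨(s.reg .rdi).toNat + 128, (s.reg .rdi).toNat + 132⟩,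
      shadowSpan (A.1.B + A.1.S + 32) (A.1.B + A.1.S + 32 + (s.reg .rsi).toNat % 2 ^ 32)] s.mem sr.mem)
    (hpost : (setup_malloc.spec A.2 g.frames' A.1).post s sr) (hfit : ¬ A.1.Fits ((s.reg .rsi).toNat % 2 ^ 32))
    (hn : A.1.B + A.1.S + 32 + (s.reg .rsi).toNat % 2 ^ 32 + 7 ≤ 0x1000000)
    (hrip : sr.rip = pc') (hrsp : sr.reg .rsp = v.reg .rsp) (hcode : CodeOK u₀ sr.mem) (hinv : abiInv sr)
    (hr14 : sr.reg .r14 = v.reg .r14) :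
    Frame u₀ g pc' A sr ∧ Cur g i A2 A3 Ai A sr ∧ g.cb sr.mem i = g.cb v.mem i ∧ AllKept A.1.Blk v.mem sr.mem ∧
      sr.reg .rax = 0 := by
  obtain ⟨hrax, ha', hun, _hfailSame⟩ := hpost.2 hfit
  rw [hrdi] at ha'
  have hpos := Pos.of h hc
  have p1 := hpos.r_eq
  have p2 := hpos.ra_hi
  have p3 := hpos.ra_lo
  -- no shadow byte was written: neither by the push nor by the callee, so the shadow window of the footprint is moot
  have hun0 : ShadowUntouched v.mem s.mem := by
    rw [hmem]
    exact Mem.eqOn_writeLE v.mem a 8 x 0xC00000 0x200000 (by omega) (by omega)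
  have hunAll : ShadowUntouched v.mem sr.mem := Mem.EqOn.trans hun0 hun
  -- the footprint without its shadow window
  have hs' : Mem.SameExcept [⟨(s.reg .rsp).toNat - 80, (s.reg .rsp).toNat⟩,
      ⟨(s.reg .rdi).toNat + 8, (s.reg .rdi).toNat + 12⟩, ⟨(s.reg .rdi).toNat + 128, (s.reg .rdi).toNat + 132⟩,
      shadowSpan 0 0] s.mem sr.mem := by
    intro b hb
    by_cases hsh : 0xC00000 ≤ b.toNat ∧ b.toNat < 0xE00000
    · exact hun b hsh.1 hsh.2
    · apply hs
      intro w hw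
      simp only [List.mem_cons, List.mem_nil_iff, or_false] at hw
      rcases hw with rfl | rfl | rfl | rfl
      · exact hb _ List.mem_cons_self
      · exact hb _ (List.mem_cons_of_mem _ List.mem_cons_self)
      · exact hb _ (List.mem_cons_of_mem _ (List.mem_cons_of_mem _ List.mem_cons_self))
      · have a1 := hc.sd.arena.AR1
        have a2 := hc.sd.arena.AR2
        simp only [shadowSpan]
        omega
  have hsh' : ShadowInv A.2 g.frames' g.R sr.mem := h.shadow.untouched hunAll
  have hx : BlkLive (listBlk g.extra) (g.Live A) := hc.sd.env.live.sub (fun B hB => runBlk_extra hB)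
  have hm := MInv.of h hc
  have hall : ∃ ws, Mem.SameExcept ws v.mem sr.mem ∧ ∀ w, w ∈ ws → AllocWin g A w := by
    have hp0 := hpos
    refine ⟨[⟨g.R - 88, g.R⟩, ⟨g.f + 8, g.f + 12⟩, ⟨g.f + 128, g.f + 132⟩], ?_, ?_⟩
    · refine Mem.SameExcept.trans (ν := s.mem) ?_ ?_
      · rw [hmem]
        apply Mem.SameExcept.writeLE
        · omega
        · refine ⟨_, List.mem_cons_self, ?_, ?_⟩
          · simp only []
            omega
          · simp only []
            omega
      · apply hs'.mono
        intro w hw b h1 h2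
        simp only [List.mem_cons, List.mem_nil_iff, or_false] at hw
        rcases hw with rfl | rfl | rfl | rfl
        · simp only [] at h1 h2
          exact ⟨_, List.mem_cons_self, by simp only []; omega, by simp only []; omega⟩
        · simp only [] at h1 h2
          exact ⟨_, List.mem_cons_of_mem _ List.mem_cons_self, by simp only []; omega, by simp only []; omega⟩
        · simp only [] at h1 h2
          exact ⟨_, List.mem_cons_of_mem _ (List.mem_cons_of_mem _ List.mem_cons_self), by simp only []; omega,
            by simp only []; omega⟩
        · simp only [shadowSpan] at h1 h2
          omega
    · intro w hw
      simp only [List.mem_cons, List.mem_nil_iff, or_false] at hw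
      unfold AllocWin
      rcases hw with rfl | rfl | rfl
      · left
        simp only []
        omega
      · right
        left
        simp only []
        omega
      · right
        right
        left
        simp only []
        omega
  obtain ⟨ws, hsame, hok⟩ := hall
  obtain ⟨r1, r2, r3, r4⟩ := Cur.free h hc hsame hok (Arena.Extends.refl _) ha' hsh' hc.hand hx h.offText hrip hrsp hcode
    hinv hr14
  exact ⟨r1, r2, r3, r4, hrax⟩

/-- **A WHOLE `call setup_malloc` THAT FAILS, FOR ANY REQUEST** (no bound on `n`): as `Cur.alloc_fail` without its hypothesis `hn`. The failure
arm of `setup_malloc.spec`'s post carries the footprint of a failed call (`Mem.SameExcept [⟨rsp − 80, rsp⟩, ⟨f + 8, f + 12⟩] u.mem v.mem`: the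
stack window and `setup_memory_required`), so the shadow window that `writes` lists for the refused request is never needed. WHEN: the `¬ Fits`
arm of every `call setup_malloc` whose request comes from stream data (C2, C5, C6, C8, C12, C14: `4·N·D`, `entries`, … up to 2^31). `hs` (the
walker's `w_same`) is not used by the proof any more; it is kept so that the call has the arguments of `Cur.alloc_call`. -/
theorem Cur.alloc_fail_any {u₀ : State} {g : Ghost} {pc pc' : Word} {i : Nat} {A2 A3 Ai : Arena} {A : Arena × List Obj}
    {v s sr : State} {a : Word} {x : Nat} (h : Frame u₀ g pc A v) (hc : Cur g i A2 A3 Ai A v)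
    (hmem : s.mem = v.mem.writeLE a 8 x) (ha : a.toNat + 8 = g.R) (hsp : (s.reg .rsp).toNat + 8 = g.R)
    (hrdi : (s.reg .rdi).toNat = g.f)
    (hs : Mem.SameExcept [⟨(s.reg .rsp).toNat - 80, (s.reg .rsp).toNat⟩,
      ⟨(s.reg .rdi).toNat + 8, (s.reg .rdi).toNat + 12⟩, ⟨(s.reg .rdi).toNat + 128, (s.reg .rdi).toNat + 132⟩,
      shadowSpan (A.1.B + A.1.S + 32) (A.1.B + A.1.S + 32 + (s.reg .rsi).toNat % 2 ^ 32)] s.mem sr.mem)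
    (hpost : (setup_malloc.spec A.2 g.frames' A.1).post s sr) (hfit : ¬ A.1.Fits ((s.reg .rsi).toNat % 2 ^ 32))
    (hrip : sr.rip = pc') (hrsp : sr.reg .rsp = v.reg .rsp) (hcode : CodeOK u₀ sr.mem) (hinv : abiInv sr)
    (hr14 : sr.reg .r14 = v.reg .r14) :
    Frame u₀ g pc' A sr ∧ Cur g i A2 A3 Ai A sr ∧ g.cb sr.mem i = g.cb v.mem i ∧ AllKept A.1.Blk v.mem sr.mem ∧
      sr.reg .rax = 0 := by
  obtain ⟨hrax, ha', hun, _hfailSame⟩ := hpost.2 hfit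
  rw [hrdi] at ha'
  have hpos := Pos.of h hc
  have p1 := hpos.r_eq
  have p2 := hpos.ra_hi
  have p3 := hpos.ra_lo
  -- no shadow byte was written: neither by the push nor by the callee, so the shadow window of the footprint is moot
  have hun0 : ShadowUntouched v.mem s.mem := by
    rw [hmem]
    exact Mem.eqOn_writeLE v.mem a 8 x 0xC00000 0x200000 (by omega) (by omega)
  have hunAll : ShadowUntouched v.mem sr.mem := Mem.EqOn.trans hun0 hun
  -- the footprint without its shadow window
  have hs' : Mem.SameExcept [⟨(s.reg .rsp).toNat - 80, (s.reg .rsp).toNat⟩,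
      ⟨(s.reg .rdi).toNat + 8, (s.reg .rdi).toNat + 12⟩, ⟨(s.reg .rdi).toNat + 128, (s.reg .rdi).toNat + 132⟩,
      shadowSpan 0 0] s.mem sr.mem := by
    -- the failure clause of the post IS the footprint of the failed call: the stack window and `setup_memory_required`
    apply _hfailSame.mono
    intro w hw b h1 h2
    simp only [List.mem_cons, List.mem_nil_iff, or_false] at hw
    rcases hw with rfl | rfl
    · exact ⟨_, List.mem_cons_self, h1, h2⟩
    · exact ⟨_, List.mem_cons_of_mem _ List.mem_cons_self, h1, h2⟩
  have hsh' : ShadowInv A.2 g.frames' g.R sr.mem := h.shadow.untouched hunAll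
  have hx : BlkLive (listBlk g.extra) (g.Live A) := hc.sd.env.live.sub (fun B hB => runBlk_extra hB)
  have hm := MInv.of h hc
  have hall : ∃ ws, Mem.SameExcept ws v.mem sr.mem ∧ ∀ w, w ∈ ws → AllocWin g A w := by
    have hp0 := hpos
    refine ⟨[⟨g.R - 88, g.R⟩, ⟨g.f + 8, g.f + 12⟩, ⟨g.f + 128, g.f + 132⟩], ?_, ?_⟩
    · refine Mem.SameExcept.trans (ν := s.mem) ?_ ?_
      · rw [hmem]
        apply Mem.SameExcept.writeLE
        · omega
        · refine ⟨_, List.mem_cons_self, ?_, ?_⟩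
          · simp only []
            omega
          · simp only []
            omega
      · apply hs'.mono
        intro w hw b h1 h2
        simp only [List.mem_cons, List.mem_nil_iff, or_false] at hw
        rcases hw with rfl | rfl | rfl | rfl
        · simp only [] at h1 h2
          exact ⟨_, List.mem_cons_self, by simp only []; omega, by simp only []; omega⟩
        · simp only [] at h1 h2
          exact ⟨_, List.mem_cons_of_mem _ List.mem_cons_self, by simp only []; omega, by simp only []; omega⟩
        · simp only [] at h1 h2
          exact ⟨_, List.mem_cons_of_mem _ (List.mem_cons_of_mem _ List.mem_cons_self), by simp only []; omega,
            by simp only []; omega⟩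
        · simp only [shadowSpan] at h1 h2
          omega
    · intro w hw
      simp only [List.mem_cons, List.mem_nil_iff, or_false] at hw
      unfold AllocWin
      rcases hw with rfl | rfl | rfl
      · left
        simp only []
        omega
      · right
        left
        simp only []
        omega
      · right
        right
        left
        simp only []
        omega
  obtain ⟨ws, hsame, hok⟩ := hall
  obtain ⟨r1, r2, r3, r4⟩ := Cur.free h hc hsame hok (Arena.Extends.refl _) ha' hsh' hc.hand hx h.offText hrip hrsp hcode
    hinv hr14
  exact ⟨r1, r2, r3, r4, hrax⟩

/-! ### 9. A whole `call setup_temp_free`: the live list SHRINKS (from the accepted proof of start_decoder.C15) -/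

/-- **A block outside the arena's buffer stays live when an object inside the buffer is released.** -/
theorem live_dropTemp {objs others : List Obj} {dead : Obj} {B : Block} {lo hi : Nat}
    (hl : B.live (Live (objs ++ others))) (hdead : lo ≤ dead.base ∧ dead.base + dead.size ≤ hi)
    (hB : B.base + B.size ≤ lo ∨ hi ≤ B.base) : B.live (Live (objs ++ dropObjs [dead] others)) := by
  rw [Block.live_iff] at hl ⊢
  intro x hx
  obtain ⟨o, ho, hb⟩ := hl x hx
  refine ⟨o, ?_, hb⟩
  rcases List.mem_append.mp ho with h1 | h2
  · exact List.mem_append_left _ h1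
  · apply List.mem_append_right
    rw [mem_dropObjs]
    refine ⟨h2, ?_⟩
    intro hd
    have e : o = dead := List.mem_singleton.mp hd
    subst e
    unfold Obj.Bytes at hb
    unfold Block.mem at hx
    omega

/-- **One live object around a range outside the arena's buffer is still there when an object inside the buffer is released.** -/
theorem liveIn_dropTemp {others : List Obj} {frames : List (Nat × FrameLayout)} {dead : Obj} {a n lo hi : Nat}
    (hl : LiveIn others frames a n) (hn : 0 < n) (hdead : lo ≤ dead.base ∧ dead.base + dead.size ≤ hi)
    (ha : a + n ≤ lo ∨ hi ≤ a) : LiveIn (dropObjs [dead] others) frames a n := by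
  obtain ⟨o, ho, h1, h2⟩ := hl
  refine ⟨o, ?_, h1, h2⟩
  rcases List.mem_append.mp ho with hs | hoth
  · exact List.mem_append_left _ hs
  · apply List.mem_append_right
    rw [mem_dropObjs]
    refine ⟨hoth, ?_⟩
    intro hd
    have e : o = dead := List.mem_singleton.mp hd
    subst e
    omega

/-- **The hand-over carrier after the release of a temp block** (`setup_temp_free`: the new arena ghost `A1'` has the same buffer,
the temp object `dead` leaves the live list): `*f`, the input, the output lie outside the arena's buffer, the globals are no
temp objects; the released object lies inside the buffer. -/
theorem hand_dropTemp {g : Ghost} {A : Arena × List Obj} {A1' : Arena} (hh : g.Hand A) (hext : A.1.Extends A1') (dead : Obj)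
    (hdead : A.1.B ≤ dead.base ∧ dead.base + dead.size ≤ A.1.B + A.1.L) (hkind : dead.kind = .temp) :
    g.Hand (A1', dropObjs [dead] A.2) := by
  have hout := hh.outside
  have hobj := hh.objOut
  have eB := hext.B
  have eL := hext.L
  simp only [voff] at hobj
  refine ⟨⟨?_, ?_, ?_, ?_, ?_, ?_⟩, ?_⟩
  · exact liveIn_dropTemp hh.obj (by simp only [voff]; omega) hdead (by simp only [voff]; omega)
  · intro hl
    have := hout (inBlock g.len) List.mem_cons_self
    exact liveIn_dropTemp (hh.inp hl) hl hdead (by simp only [vblock, inBlock] at this; omega)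
  · have := hout blockOUT (List.mem_cons_of_mem _ List.mem_cons_self)
    exact liveIn_dropTemp hh.out (by simp only [blockOUT]; omega) hdead (by simp only [blockOUT] at this ⊢; omega)
  · intro o ho
    rw [mem_dropObjs]
    refine ⟨hh.globals o ho, ?_⟩
    intro hd
    have e : o = dead := List.mem_singleton.mp hd
    subst e
    have hb : o.kind = .global := by
      simp only [Vorbis.Globals.objs, Vorbis.Globals.descs, List.map_cons, List.map_nil, List.reverse_cons,
        List.reverse_nil, List.nil_append, List.cons_append, List.mem_cons, List.mem_nil_iff, or_false] at ho
      rcases ho with rfl | rfl | rfl | rfl | rfl | rfl <;> rfl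
    rw [hb] at hkind
    exact absurd hkind (by decide)
  · show L.textHi ≤ A1'.B
    rw [eB]
    exact hh.arenaText
  · show ∀ C, C ∈ fixedBlocks g.len → C.base + C.size ≤ A1'.B ∨ A1'.B + A1'.L ≤ C.base
    rw [eB, eL]
    exact hh.outside
  · show g.f + Off.sizeof.stb_vorbis ≤ A1'.B ∨ A1'.B + A1'.L ≤ g.f
    rw [eB, eL]
    exact hh.objOut

/-- **A WHOLE `call setup_temp_free(f, p, sz)` THAT RELEASES THE TOP TEMP BLOCK, in the walker's terms** (C5, C7, C8, C11, C15, the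
error paths of C12 / C13): `v` = the cut point, `s` = the state at the callee's entry (`hmem` = `w_mem_<addr>`, the pushed return
address), `sr` = the returned state; `htemps`, `hrsi`, `hsz`: the LIFO precondition as the caller proved it at `pre_<addr>`; `hs` =
`w_same` after `simp only [X86.User.Spec.footprint, vspec] at w_same`; `hpost` = `w_post`; `hne`: p ≠ NULL. Gives `Frame` and CUR(i)
at `sr` for the ghost `(A.1.withTemp (A.1.T + r8 n + 32) rest, dropObjs [A.1.tempObj (A.1.T, m)] A.2)` — EXACTLY the ghost of
`setup_temp_free.spec`'s post —, `cb(i)` unmoved, every setup block kept. (`(A.withTemp T' keep).Blk = A.Blk` by `rfl`.) -/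
theorem Cur.free_call {u₀ : State} {g : Ghost} {pc pc' : Word} {i : Nat} {A2 A3 Ai : Arena} {A : Arena × List Obj}
    {v s sr : State} {a : Word} {x m : Nat} {rest : List (Nat × Nat)} (h : Frame u₀ g pc A v) (hc : Cur g i A2 A3 Ai A v)
    (hmem : s.mem = v.mem.writeLE a 8 x) (ha : a.toNat + 8 = g.R) (hsp : (s.reg .rsp).toNat + 8 = g.R)
    (hrdi : (s.reg .rdi).toNat = g.f) (htemps : A.1.temps = (A.1.T, m) :: rest)
    (hrsi : (s.reg .rsi).toNat = A.1.B + A.1.T) (hsz : r8 ((s.reg .rdx).toNat % 2 ^ 32) = r8 m)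
    (hs : Mem.SameExcept [⟨(s.reg .rsp).toNat - 48, (s.reg .rsp).toNat⟩,
      ⟨(s.reg .rdi).toNat + 132, (s.reg .rdi).toNat + 136⟩,
      shadowSpan (s.reg .rsi).toNat ((s.reg .rsi).toNat + r8 ((s.reg .rdx).toNat % 2 ^ 32))] s.mem sr.mem)
    (hpost : (setup_temp_free.spec A.2 g.frames' A.1 m rest).post s sr) (hne : s.reg .rsi ≠ 0)
    (hrip : sr.rip = pc') (hrsp : sr.reg .rsp = v.reg .rsp) (hcode : CodeOK u₀ sr.mem) (hinv : abiInv sr)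
    (hr14 : sr.reg .r14 = v.reg .r14) :
    Frame u₀ g pc' (A.1.withTemp (A.1.T + r8 ((s.reg .rdx).toNat % 2 ^ 32) + 32) rest,
        dropObjs [A.1.tempObj (A.1.T, m)] A.2) sr ∧
      Cur g i A2 A3 Ai (A.1.withTemp (A.1.T + r8 ((s.reg .rdx).toNat % 2 ^ 32) + 32) rest,
        dropObjs [A.1.tempObj (A.1.T, m)] A.2) sr ∧
      g.cb sr.mem i = g.cb v.mem i ∧ AllKept A.1.Blk v.mem sr.mem := by
  obtain ⟨ha', hsh'⟩ := hpost.2 hne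
  rw [hrdi] at ha'
  rw [hsp] at hsh'
  have hpos := Pos.of h hc
  have p1 := hpos.r_eq
  have p2 := hpos.ra_hi
  have p3 := hpos.ra_lo
  have harena := hc.sd.arena
  obtain ⟨_, htop⟩ := harena.top_eq_T htemps
  have hl := le_r8 m
  have hext := A.1.extends_withTemp (A.1.T + r8 ((s.reg .rdx).toNat % 2 ^ 32) + 32) rest
  -- the released object lies inside the arena's buffer
  have hdead : A.1.B ≤ (A.1.tempObj (A.1.T, m)).base ∧
      (A.1.tempObj (A.1.T, m)).base + (A.1.tempObj (A.1.T, m)).size ≤ A.1.B + A.1.L := by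
    show A.1.B ≤ A.1.B + A.1.T ∧ A.1.B + A.1.T + m ≤ A.1.B + A.1.L
    omega
  have hand' := hand_dropTemp hc.hand hext (A.1.tempObj (A.1.T, m)) hdead rfl
  have hx : BlkLive (listBlk g.extra)
      (g.Live (A.1.withTemp (A.1.T + r8 ((s.reg .rdx).toNat % 2 ^ 32) + 32) rest,
        dropObjs [A.1.tempObj (A.1.T, m)] A.2)) := by
    intro B hB
    have hlB : B.live (Live (stackObjs g.frames' ++ A.2)) := hc.sd.env.live B (runBlk_extra hB)
    apply live_dropTemp hlB hdead
    rcases List.mem_cons.mp hB with rfl | hm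
    · have := hpos.objOut
      simp only [vblock, voff]
      omega
    · exact hpos.fixedOut B hm
  have hoff' : ∀ o, o ∈ dropObjs [A.1.tempObj (A.1.T, m)] A.2 → L.textHi ≤ o.base :=
    fun o ho => h.offText o (mem_dropObjs.mp ho).1
  -- the push and the callee's footprint as one footprint over the cut point's memory
  have hall : Mem.SameExcept [⟨g.R - 56, g.R⟩, ⟨g.f + 132, g.f + 136⟩,
      shadowSpan (A.1.B + A.1.T) (A.1.B + A.1.T + r8 m)] v.mem sr.mem := by
    refine Mem.SameExcept.trans (ν := s.mem) ?_ ?_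
    · rw [hmem]
      apply Mem.SameExcept.writeLE
      · omega
      · refine ⟨_, List.mem_cons_self, ?_, ?_⟩
        · simp only []
          omega
        · simp only []
          omega
    · apply hs.mono
      intro w hw b h1 h2
      simp only [List.mem_cons, List.mem_nil_iff, or_false] at hw
      rcases hw with rfl | rfl | rfl
      · simp only [] at h1 h2
        exact ⟨_, List.mem_cons_self, by simp only []; omega, by simp only []; omega⟩
      · simp only [] at h1 h2
        exact ⟨_, List.mem_cons_of_mem _ List.mem_cons_self, by simp only []; omega, by simp only []; omega⟩
      · rw [hrsi, hsz] at h1 h2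
        exact ⟨_, List.mem_cons_of_mem _ (List.mem_cons_of_mem _ List.mem_cons_self), h1, h2⟩
  have hok : ∀ w, w ∈ [(⟨g.R - 56, g.R⟩ : Span), ⟨g.f + 132, g.f + 136⟩,
      shadowSpan (A.1.B + A.1.T) (A.1.B + A.1.T + r8 m)] → AllocWin g A w := by
    intro w hw
    simp only [List.mem_cons, List.mem_nil_iff, or_false] at hw
    unfold AllocWin
    rcases hw with rfl | rfl | rfl
    · left
      simp only []
      omega
    · right
      right
      left
      simp only []
      omega
    · right
      right
      right
      simp only [shadowSpan]
      omega
  exact Cur.free h hc hall hok hext ha' hsh' hand' hx hoff' hrip hrsp hcode hinv hr14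

end Vorbis.Spec.StartDecoder
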